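-- pv_equiv track=rewrite | github.com/Felix-LeeSM/Algorithm_study | 문제풀이/2025/040525 프로그래머스 홀짝트리.py | solution
-- ===== SOURCE A (Python) =====
-- from typing import List, Tuple
--
-- def parse_tree(graph: List[List[int]], entry: int, visited: List[bool]) -> Tuple[int, int]:
--     # 숫자 홀짝, 자식 홀짝
--     odd_odd = []
--     odd_even = []
--     even_odd = []
--     even_even = []
--
--     stack = [entry]
--     visited[entry] = True
--
--     while stack:
--         node = stack.pop()
--         if node % 2:
--             if len(graph[node]) % 2:
--                 odd_even.append(node)
--             else:
--                 odd_odd.append(node)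
--         else:
--             if len(graph[node]) % 2:
--                 even_even.append(node)
--             else:
--                 even_odd.append(node)
--
--         for child in graph[node]:
--             if visited[child]:
--                 continue
--
--             visited[child] = True
--             stack.append(child)
--
--     return (+(len(even_odd) + len(odd_even) == 1), +(len(odd_odd) + len(even_even) == 1))
--
-- def solution(nodes: List[int], edges: List[Tuple[int, int]]) -> Tuple[int, int]:
--     graph = [[] for _ in range(1_000_001)]
--     visited: List[bool] = [False] * 1_000_001
--
--     for a, b in edges:
--         graph[a].append(b)
--         graph[b].append(a)
--
--     odd_even = 0
--     rev_odd_even = 0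
--
--     for node in nodes:
--         if visited[node]:
--             continue
--
--         oe, roe = parse_tree(graph, node, visited)
--         odd_even += oe
--         rev_odd_even += roe
--
--     return [odd_even, rev_odd_even]
-- ===== SOURCE B (Python) =====
-- def solution(nodes, edges):
--     # Connected components by union-by-relabeling (no graph traversal, no DFS/BFS):
--     # comp maps each seen id to its component label; members lists each label's ids;
--     # merging relabels the smaller class (weighted quick-union).
--     comp = {}
--     members = {}
--     deg = {}
--     for a, b in edges:
--         for v in (a, b):
--             if v not in comp:
--                 comp[v] = v
--                 members[v] = [v]
--             deg[v] = deg.get(v, 0) + 1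
--         la, lb = comp[a], comp[b]
--         if la != lb:
--             if len(members[la]) < len(members[lb]):
--                 la, lb = lb, la
--             moved = members.pop(lb)
--             for m in moved:
--                 comp[m] = la
--             members[la].extend(moved)
--     for n in nodes:
--         if n not in comp:
--             comp[n] = n
--             members[n] = [n]
--     same = {}
--     diff = {}
--     for v, l in comp.items():
--         if v % 2 == deg.get(v, 0) % 2:
--             same[l] = same.get(l, 0) + 1
--         else:
--             diff[l] = diff.get(l, 0) + 1
--     marked = {comp[n] for n in nodes}
--     return [sum(same.get(l, 0) == 1 for l in marked),
--             sum(diff.get(l, 0) == 1 for l in marked)]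
-- ===== Notes on version B (the rewrite author's own statement) =====
-- stated objective: alternative
-- what changed: B computes connected components with union-by-relabeling (a comp label map merged per edge, smaller class relabeled) and reads both answers off the final label partition by grouped counting, instead of A's per-start stack DFS over two preallocated 1,000,001-slot arrays.
-- outside the precondition, e.g. on solution([-1], [(-1, 1000000)]): A returns [0, 1], B returns [1, 1]
import Mathlib
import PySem

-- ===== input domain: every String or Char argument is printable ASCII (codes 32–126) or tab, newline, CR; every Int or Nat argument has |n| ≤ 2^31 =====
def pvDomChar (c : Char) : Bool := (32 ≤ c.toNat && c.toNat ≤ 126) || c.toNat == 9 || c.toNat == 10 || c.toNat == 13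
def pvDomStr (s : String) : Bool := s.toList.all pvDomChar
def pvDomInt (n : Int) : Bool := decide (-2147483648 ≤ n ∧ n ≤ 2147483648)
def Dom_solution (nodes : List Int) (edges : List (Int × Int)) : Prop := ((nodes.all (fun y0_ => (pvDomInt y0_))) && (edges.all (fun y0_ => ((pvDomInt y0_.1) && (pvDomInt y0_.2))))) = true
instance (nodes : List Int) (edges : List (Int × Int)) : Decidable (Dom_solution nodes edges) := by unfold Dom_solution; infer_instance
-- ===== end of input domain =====

-- B replaces A's DFS traversal (preallocated 1,000,001-slot arrays, per-component stack walk)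
-- with union-by-relabeling connected components: no traversal at all — labels are merged per
-- edge and the answer is read off by grouping nodes by final label (objective: alternative).

-- ===== PORT A =====
-- Python list-index normalization (negative index wraps; none = IndexError, excluded by Pre_solution)
def pvIdxA (sz : Nat) (i : Int) : Option Nat :=
  if 0 ≤ i then (if i < (sz : Int) then some i.toNat else none)
  else (if 0 ≤ i + sz then some (i + sz).toNat else none)

-- xs[i] read with default d: exact where Python returns; d only where Python raises (outside Pre_)
def pvArrGet {α : Type} (g : Array α) (i : Int) (d : α) : α :=
  match pvIdxA g.size i with
  | some n => g[n]?.getD d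
  | none => d

-- xs[i] = v: exact where Python returns; no-op only where Python raises (outside Pre_)
def pvArrSet {α : Type} (g : Array α) (i : Int) (v : α) : Array α :=
  match pvIdxA g.size i with
  | some n => g.setIfInBounds n v
  | none => g

-- while-stack loop of parse_tree; fuel bounds the iteration count (each iteration pops one
-- element and every pushed node was unvisited and is marked, so ≤ 1_000_002 iterations suffice
-- on Pre_ inputs; the fuel-out value is never reached there)
def pvFuel : Nat := 1000002

def pvParseLoop (graph : Array (List Int)) :
    Nat → List Int → Array Bool → List Int → List Int → List Int → List Int →
    (List Int × List Int × List Int × List Int) × Array Bool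
  | 0, _, vis, oo, oe, eo, ee => ((oo, oe, eo, ee), vis)
  | fuel+1, stack, vis, oo, oe, eo, ee =>
    match stack with
    | [] => ((oo, oe, eo, ee), vis)
    | node :: rest =>
      let nbrs := pvArrGet graph node []
      let cls :=
        if PySem.Int.mod node 2 ≠ 0 then
          if PySem.Int.mod (nbrs.length : Int) 2 ≠ 0 then (oo, oe ++ [node], eo, ee)
          else (oo ++ [node], oe, eo, ee)
        else
          if PySem.Int.mod (nbrs.length : Int) 2 ≠ 0 then (oo, oe, eo, ee ++ [node])
          else (oo, oe, eo ++ [node], ee)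
      let st := nbrs.foldl (fun (p : Array Bool × List Int) c =>
          if pvArrGet p.1 c true then p else (pvArrSet p.1 c true, c :: p.2)) (vis, rest)
      pvParseLoop graph fuel st.2 st.1 cls.1 cls.2.1 cls.2.2.1 cls.2.2.2

def pvParseTree (graph : Array (List Int)) (entry : Int) (visited : Array Bool) :
    (Int × Int) × Array Bool :=
  let visited := pvArrSet visited entry true
  let r := pvParseLoop graph pvFuel [entry] visited [] [] [] []
  ((if r.1.2.2.1.length + r.1.2.1.length == 1 then (1 : Int) else 0,
    if r.1.1.length + r.1.2.2.2.length == 1 then (1 : Int) else 0), r.2)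

def solution (nodes : List Int) (edges : List (Int × Int)) : List Int :=
  let graph := edges.foldl (fun g p =>
      let g := pvArrSet g p.1 (pvArrGet g p.1 [] ++ [p.2])
      pvArrSet g p.2 (pvArrGet g p.2 [] ++ [p.1]))
    (Array.replicate 1000001 ([] : List Int))
  let visited := Array.replicate 1000001 false
  let r := nodes.foldl (fun (st : Int × Int × Array Bool) node =>
      if pvArrGet st.2.2 node true then st
      else
        let pr := pvParseTree graph node st.2.2
        (st.1 + pr.1.1, st.2.1 + pr.1.2, pr.2)) (0, 0, visited)
  [r.1, r.2.1]

-- ===== PORT B =====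
-- one merge step of Source B: relabel the smaller class (members.pop(lb) is getD + erase — the
-- key is always present there, so this is exact)
def pvMergeB (comp : PySem.Dict Int Int) (members : PySem.Dict Int (List Int)) (a b : Int) :
    PySem.Dict Int Int × PySem.Dict Int (List Int) :=
  let la := comp.getD a a
  let lb := comp.getD b b
  if la == lb then (comp, members)
  else
    let p := if (members.getD la []).length < (members.getD lb []).length then (lb, la) else (la, lb)
    let moved := members.getD p.2 []
    let members := members.erase p.2
    let comp := moved.foldl (fun c m => c.insert m p.1) comp
    (comp, members.insert p.1 (members.getD p.1 [] ++ moved))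

-- the 'for v in (a, b)' body: ensure v is present, then bump its degree
def pvSeen (st : PySem.Dict Int Int × PySem.Dict Int (List Int) × PySem.Dict Int Int) (v : Int) :
    PySem.Dict Int Int × PySem.Dict Int (List Int) × PySem.Dict Int Int :=
  let st := if st.1.contains v then st else (st.1.insert v v, st.2.1.insert v [v], st.2.2)
  (st.1, st.2.1, st.2.2.insert v (st.2.2.getD v 0 + 1))

def solution_alt (nodes : List Int) (edges : List (Int × Int)) : List Int :=
  let st := edges.foldl (fun st e =>
      let st := pvSeen (pvSeen st e.1) e.2
      let cm := pvMergeB st.1 st.2.1 e.1 e.2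
      (cm.1, cm.2, st.2.2)) (PySem.Dict.empty, PySem.Dict.empty, PySem.Dict.empty)
  let cm := nodes.foldl (fun (cm : PySem.Dict Int Int × PySem.Dict Int (List Int)) n =>
      if cm.1.contains n then cm else (cm.1.insert n n, cm.2.insert n [n])) (st.1, st.2.1)
  let comp := cm.1
  let deg := st.2.2
  let sd := comp.items.foldl (fun (p : PySem.Dict Int Int × PySem.Dict Int Int) vl =>
      if PySem.Int.mod vl.1 2 == PySem.Int.mod (deg.getD vl.1 0) 2
      then (p.1.insert vl.2 (p.1.getD vl.2 0 + 1), p.2)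
      else (p.1, p.2.insert vl.2 (p.2.getD vl.2 0 + 1))) (PySem.Dict.empty, PySem.Dict.empty)
  let marked : PySem.Set Int := PySem.Set.ofList (nodes.map (fun n => comp.getD n n))
  [marked.foldl (fun acc l => acc + (if sd.1.getD l 0 == 1 then (1 : Int) else 0)) 0,
   marked.foldl (fun acc l => acc + (if sd.2.getD l 0 == 1 then (1 : Int) else 0)) 0]

-- ===== PRECONDITION & SPEC =====
-- the ids a given input mentions (nodes list and both ends of every edge)
def pvU (nodes : List Int) (edges : List (Int × Int)) : List Int :=
  nodes ++ edges.flatMap (fun p => [p.1, p.2])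

-- Pre_ admits exactly the inputs A returns on (all ids in [-1000001, 1000000], anything else
-- raises IndexError) except those mentioning two DISTINCT ids congruent mod 1_000_001: A's
-- fixed-size arrays read a negative id via Python's negative-index wraparound and so alias id x
-- with id x + 1_000_001 — an accidental corner (ids are nonnegative in the problem) on which
-- B, keying by id value, defensibly keeps the two ids distinct.
def Pre_solution (nodes : List Int) (edges : List (Int × Int)) : Prop :=
  (∀ x ∈ pvU nodes edges, -1000001 ≤ x ∧ x ≤ 1000000) ∧
  ∀ x ∈ pvU nodes edges, ∀ y ∈ pvU nodes edges,
    x % 1000001 = y % 1000001 → x = y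
instance (nodes : List Int) (edges : List (Int × Int)) : Decidable (Pre_solution nodes edges) := by
  unfold Pre_solution; infer_instance

def pvWitness_solution : List Int × (List (Int × Int)) := ([1, 4, 7], [(1, 2), (2, 3), (4, 5)])

def Spec_solution (nodes : List Int) (edges : List (Int × Int)) (out : List Int) : Prop := out = solution_alt nodes edges
instance (nodes : List Int) (edges : List (Int × Int)) (out : List Int) : Decidable (Spec_solution nodes edges out) := by unfold Spec_solution; infer_instance

-- ===== CLAIM (what is proved, stated in full; the proofs are below) =====
def Claim_equal_solution : Prop := ∀ (nodes : List Int) (edges : List (Int × Int)), Dom_solution nodes edges → Pre_solution nodes edges → Spec_solution nodes edges (solution nodes edges)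

-- ===== LEMMAS AND PROOFS =====

---------------------------------------------------------------------------
-- Part 0: a dict/set reference form of A's DFS (pvARef), and solution = pvARef.
---------------------------------------------------------------------------

-- the adjacency dict built the way A builds its array of buckets
def pvAdj (edges : List (Int × Int)) : PySem.Dict Int (List Int) :=
  edges.foldl (fun d p =>
      let d := d.insert p.1 (d.getD p.1 [] ++ [p.2])
      d.insert p.2 (d.getD p.2 [] ++ [p.1])) PySem.Dict.empty

def pvLoopR (adj : PySem.Dict Int (List Int)) :
    Nat → List Int → PySem.Set Int → Int → Int → (Int × Int) × PySem.Set Int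
  | 0, _, vis, same, diff => ((same, diff), vis)
  | fuel+1, stack, vis, same, diff =>
    match stack with
    | [] => ((same, diff), vis)
    | node :: rest =>
      let nbrs := adj.getD node []
      let sd :=
        if PySem.Int.mod node 2 == PySem.Int.mod (nbrs.length : Int) 2
        then (same + 1, diff) else (same, diff + 1)
      let st := nbrs.foldl (fun (p : PySem.Set Int × List Int) c =>
          if PySem.Set.contains p.1 c then p else (PySem.Set.add p.1 c, c :: p.2)) (vis, rest)
      pvLoopR adj fuel st.2 st.1 sd.1 sd.2

def pvARef (nodes : List Int) (edges : List (Int × Int)) : List Int :=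
  let adj := pvAdj edges
  let r := nodes.foldl (fun (st : Int × Int × PySem.Set Int) start =>
      if PySem.Set.contains st.2.2 start then st
      else
        let pr := pvLoopR adj pvFuel [start] (PySem.Set.add st.2.2 start) 0 0
        (st.1 + (if pr.1.1 == 1 then (1 : Int) else 0),
         st.2.1 + (if pr.1.2 == 1 then (1 : Int) else 0), pr.2))
    ((0 : Int), (0 : Int), PySem.Set.empty)
  [r.1, r.2.1]

-- the array index A's wraparound assigns to id x
def pvIdx (x : Int) : Nat := (x % 1000001).toNat

-- the id universe is in range and no two distinct ids share an array slot
def pvOK (U : List Int) : Prop :=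
  (∀ x ∈ U, -1000001 ≤ x ∧ x ≤ 1000000) ∧
  ∀ x ∈ U, ∀ y ∈ U, x % 1000001 = y % 1000001 → x = y

-- A's array-of-buckets agrees with the dict at every mentioned id; buckets hold mentioned ids
def pvRelG (U : List Int) (g : Array (List Int)) (d : PySem.Dict Int (List Int)) : Prop :=
  g.size = 1000001 ∧
  (∀ x ∈ U, g[pvIdx x]?.getD [] = d.getD x []) ∧
  (∀ n : Nat, n < 1000001 → ∀ c ∈ g[n]?.getD ([] : List Int), c ∈ U)

-- A's visited array agrees with the visited set at every mentioned id
def pvRelV (U : List Int) (v : Array Bool) (s : PySem.Set Int) : Prop :=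
  v.size = 1000001 ∧ ∀ x ∈ U, v[pvIdx x]?.getD true = PySem.Set.contains s x

theorem pvIdx_lt (x : Int) : pvIdx x < 1000001 := by
  unfold pvIdx
  omega

theorem pvIdxA_eq {i : Int} (h1 : -1000001 ≤ i) (h2 : i ≤ 1000000) :
    pvIdxA 1000001 i = some (pvIdx i) := by
  unfold pvIdxA pvIdx
  split_ifs with ha hb hc
  · simp only [Option.some.injEq]; omega
  · omega
  · simp only [Option.some.injEq]; omega
  · omega

theorem pvArrGet_u {α : Type} (g : Array α) {i : Int} (d : α) (hs : g.size = 1000001)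
    (h1 : -1000001 ≤ i) (h2 : i ≤ 1000000) : pvArrGet g i d = g[pvIdx i]?.getD d := by
  unfold pvArrGet; rw [hs, pvIdxA_eq h1 h2]

theorem pvArrSet_u {α : Type} (g : Array α) {i : Int} (v : α) (hs : g.size = 1000001)
    (h1 : -1000001 ≤ i) (h2 : i ≤ 1000000) : pvArrSet g i v = g.setIfInBounds (pvIdx i) v := by
  unfold pvArrSet; rw [hs, pvIdxA_eq h1 h2]

theorem pvSet_getD {α : Type} (g : Array α) (i n : Nat) (v d : α) (hi : i < g.size) :
    (g.setIfInBounds i v)[n]?.getD d = if i = n then v else g[n]?.getD d := by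
  rw [Array.getElem?_setIfInBounds]
  by_cases h : i = n
  · rw [if_pos h, if_pos hi, if_pos h, Option.getD_some]
  · rw [if_neg h, if_neg h]

theorem pvIdx_inj {U : List Int} (hU : pvOK U) {x y : Int} (hx : x ∈ U) (hy : y ∈ U)
    (h : pvIdx x = pvIdx y) : x = y := by
  refine hU.2 x hx y hy ?_
  unfold pvIdx at h
  omega

theorem pvRelG_append {U : List Int} (hU : pvOK U) {g : Array (List Int)}
    {d : PySem.Dict Int (List Int)} {a b : Int} (hrel : pvRelG U g d) (ha : a ∈ U) (hb : b ∈ U) :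
    pvRelG U (pvArrSet g a (pvArrGet g a [] ++ [b])) (d.insert a (d.getD a [] ++ [b])) := by
  obtain ⟨hs, heq, hin⟩ := hrel
  obtain ⟨ha1, ha2⟩ := hU.1 a ha
  rw [pvArrSet_u g _ hs ha1 ha2, pvArrGet_u g _ hs ha1 ha2]
  refine ⟨by simp [hs], ?_, ?_⟩
  · intro x hx
    rw [pvSet_getD _ _ _ _ _ (by rw [hs]; exact pvIdx_lt a), PySem.Dict.getD_insert]
    by_cases hxa : pvIdx a = pvIdx x
    · have hxeq : x = a := pvIdx_inj hU hx ha hxa.symm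
      subst hxeq
      rw [if_pos hxa, if_pos rfl, heq x hx]
    · have hne : ¬ x = a := fun h => hxa (h ▸ rfl)
      rw [if_neg hxa, if_neg hne, heq x hx]
  · intro n hn c hc
    rw [pvSet_getD _ _ _ _ _ (by rw [hs]; exact pvIdx_lt a)] at hc
    by_cases hna : pvIdx a = n
    · rw [if_pos hna] at hc
      rcases List.mem_append.mp hc with h | h
      · exact hin (pvIdx a) (pvIdx_lt a) _ h
      · exact (List.mem_singleton.mp h) ▸ hb
    · rw [if_neg hna] at hc
      exact hin n hn c hc

theorem pvRelG_build {U : List Int} (hU : pvOK U) (edges : List (Int × Int))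
    (hpre : ∀ p ∈ edges, p.1 ∈ U ∧ p.2 ∈ U) :
    pvRelG U
      (edges.foldl (fun g p =>
          let g := pvArrSet g p.1 (pvArrGet g p.1 [] ++ [p.2])
          pvArrSet g p.2 (pvArrGet g p.2 [] ++ [p.1]))
        (Array.replicate 1000001 ([] : List Int)))
      (pvAdj edges) := by
  unfold pvAdj
  have h0 : pvRelG U (Array.replicate 1000001 ([] : List Int)) PySem.Dict.empty := by
    refine ⟨by simp, ?_, ?_⟩
    · intro x _; simp [pvIdx_lt x]
    · intro n hn; simp [hn]
  revert h0
  generalize (Array.replicate 1000001 ([] : List Int)) = g0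
  generalize (PySem.Dict.empty : PySem.Dict Int (List Int)) = d0
  induction edges generalizing g0 d0 with
  | nil => intro h; exact h
  | cons p t ih =>
    intro h
    simp only [List.foldl_cons]
    have hp := hpre p (List.mem_cons_self ..)
    exact ih (fun q hq => hpre q (List.mem_cons_of_mem _ hq)) _ _
      (pvRelG_append hU (pvRelG_append hU h hp.1 hp.2) hp.2 hp.1)

-- marking one mentioned id visited preserves the visited relation
theorem pvRelV_mark {U : List Int} (hU : pvOK U) {v : Array Bool} {s : PySem.Set Int} {c : Int}
    (hrel : pvRelV U v s) (hc : c ∈ U) :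
    pvRelV U (pvArrSet v c true) (PySem.Set.add s c) := by
  obtain ⟨hs, heq⟩ := hrel
  obtain ⟨hc1, hc2⟩ := hU.1 c hc
  rw [pvArrSet_u v _ hs hc1 hc2]
  refine ⟨by simp [hs], ?_⟩
  intro x hx
  rw [pvSet_getD _ _ _ _ _ (by rw [hs]; exact pvIdx_lt c)]
  have hcontains : PySem.Set.contains (PySem.Set.add s c) x
      = (decide (x = c) || PySem.Set.contains s x) := by
    apply Bool.eq_iff_iff.mpr
    simp [PySem.Set.mem_add, or_comm]
  rw [hcontains]
  by_cases hxc : pvIdx c = pvIdx x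
  · have : x = c := pvIdx_inj hU hx hc hxc.symm
    rw [if_pos hxc, decide_eq_true this, Bool.true_or]
  · have hne : ¬ x = c := fun h => hxc (h ▸ rfl)
    rw [if_neg hxc, decide_eq_false hne, Bool.false_or, heq x hx]

-- the child-pushing folds of the two loops agree
theorem pvFold_sim {U : List Int} (hU : pvOK U) {v : Array Bool} {s : PySem.Set Int}
    (nbrs rest : List Int)
    (hrel : pvRelV U v s) (hn : ∀ c ∈ nbrs, c ∈ U) (hr : ∀ x ∈ rest, x ∈ U) :
    pvRelV U (nbrs.foldl (fun (p : Array Bool × List Int) c =>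
        if pvArrGet p.1 c true then p else (pvArrSet p.1 c true, c :: p.2)) (v, rest)).1
      (nbrs.foldl (fun (p : PySem.Set Int × List Int) c =>
        if PySem.Set.contains p.1 c then p else (PySem.Set.add p.1 c, c :: p.2)) (s, rest)).1 ∧
    (nbrs.foldl (fun (p : Array Bool × List Int) c =>
        if pvArrGet p.1 c true then p else (pvArrSet p.1 c true, c :: p.2)) (v, rest)).2
      = (nbrs.foldl (fun (p : PySem.Set Int × List Int) c =>
        if PySem.Set.contains p.1 c then p else (PySem.Set.add p.1 c, c :: p.2)) (s, rest)).2 ∧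
    ∀ x ∈ (nbrs.foldl (fun (p : Array Bool × List Int) c =>
        if pvArrGet p.1 c true then p else (pvArrSet p.1 c true, c :: p.2)) (v, rest)).2, x ∈ U := by
  induction nbrs generalizing v s rest with
  | nil => exact ⟨hrel, rfl, hr⟩
  | cons c t ih =>
    have hc : c ∈ U := hn c (List.mem_cons_self ..)
    have ht : ∀ x ∈ t, x ∈ U := fun x hx => hn x (List.mem_cons_of_mem _ hx)
    simp only [List.foldl_cons]
    obtain ⟨hc1, hc2⟩ := hU.1 c hc
    have hread : pvArrGet v c true = PySem.Set.contains s c := by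
      rw [pvArrGet_u v _ hrel.1 hc1 hc2, hrel.2 c hc]
    rw [hread]
    by_cases hvis : PySem.Set.contains s c = true
    · rw [if_pos hvis, if_pos hvis]
      exact ih _ hrel ht hr
    · rw [Bool.not_eq_true] at hvis
      rw [hvis, if_neg (by simp), if_neg (by simp)]
      exact ih _ (pvRelV_mark hU hrel hc) ht
        (fun x hx => (List.mem_cons.mp hx).elim (fun h => by rw [h]; exact hc) (fun h => hr x h))

theorem pvMod2 (a : Int) : PySem.Int.mod a 2 = 0 ∨ PySem.Int.mod a 2 = 1 := by
  have h1 := PySem.Int.mod_nonneg a (b := 2) (by norm_num)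
  have h2 := PySem.Int.mod_lt a (b := 2) (by norm_num)
  omega

-- lock-step simulation of A's while-loop and the reference loop
theorem pvLoop_sim {U : List Int} (hU : pvOK U) {g : Array (List Int)}
    {d : PySem.Dict Int (List Int)} (hg : pvRelG U g d) :
    ∀ (fuel : Nat) (stack : List Int) (v : Array Bool) (s : PySem.Set Int)
      (oo oe eo ee : List Int),
    pvRelV U v s → (∀ x ∈ stack, x ∈ U) →
    (pvLoopR d fuel stack s ((eo.length + oe.length : Nat) : Int)
        ((oo.length + ee.length : Nat) : Int)).1.1
        = (((pvParseLoop g fuel stack v oo oe eo ee).1.2.2.1.length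
            + (pvParseLoop g fuel stack v oo oe eo ee).1.2.1.length : Nat) : Int) ∧
    (pvLoopR d fuel stack s ((eo.length + oe.length : Nat) : Int)
        ((oo.length + ee.length : Nat) : Int)).1.2
        = (((pvParseLoop g fuel stack v oo oe eo ee).1.1.length
            + (pvParseLoop g fuel stack v oo oe eo ee).1.2.2.2.length : Nat) : Int) ∧
    pvRelV U (pvParseLoop g fuel stack v oo oe eo ee).2
      (pvLoopR d fuel stack s ((eo.length + oe.length : Nat) : Int)
        ((oo.length + ee.length : Nat) : Int)).2 := by
  intro fuel
  induction fuel with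
  | zero => intro stack v s oo oe eo ee hv _; exact ⟨rfl, rfl, hv⟩
  | succ fuel ih =>
    intro stack v s oo oe eo ee hv hst
    match stack with
    | [] => exact ⟨rfl, rfl, hv⟩
    | node :: rest =>
      have hnode : node ∈ U := hst node (List.mem_cons_self ..)
      have hrest : ∀ x ∈ rest, x ∈ U := fun x hx => hst x (List.mem_cons_of_mem _ hx)
      obtain ⟨hgs, hgeq, hgin⟩ := hg
      obtain ⟨hn1, hn2⟩ := hU.1 node hnode
      have hnbrs : pvArrGet g node [] = d.getD node [] := by
        rw [pvArrGet_u g _ hgs hn1 hn2, hgeq node hnode]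
      have hnin : ∀ c ∈ pvArrGet g node [], c ∈ U := by
        rw [pvArrGet_u g _ hgs hn1 hn2]
        exact hgin (pvIdx node) (pvIdx_lt node)
      simp only [pvParseLoop, pvLoopR, ← hnbrs]
      obtain ⟨hfv, hfs, hfin⟩ := pvFold_sim hU (pvArrGet g node []) rest hv hnin hrest
      rw [← hfs]
      rcases pvMod2 node with hm1 | hm1 <;> rcases pvMod2 ((pvArrGet g node []).length : Int) with hm2 | hm2 <;>
        simp only [hm1, hm2]
      · have H := ih _ _ _ oo oe (eo ++ [node]) ee hfv hfin
        norm_num at H ⊢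
        ring_nf at H ⊢
        exact H
      · have H := ih _ _ _ oo oe eo (ee ++ [node]) hfv hfin
        norm_num at H ⊢
        ring_nf at H ⊢
        exact H
      · have H := ih _ _ _ (oo ++ [node]) oe eo ee hfv hfin
        norm_num at H ⊢
        ring_nf at H ⊢
        exact H
      · have H := ih _ _ _ oo (oe ++ [node]) eo ee hfv hfin
        norm_num at H ⊢
        ring_nf at H ⊢
        exact H

-- the per-start folds of A and the reference agree
theorem pvOuter_sim {U : List Int} (hU : pvOK U) {g : Array (List Int)}
    {d : PySem.Dict Int (List Int)} (hg : pvRelG U g d) :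
    ∀ (nodes : List Int), (∀ n ∈ nodes, n ∈ U) →
    ∀ (v : Array Bool) (s : PySem.Set Int) (x y : Int), pvRelV U v s →
    (nodes.foldl (fun (st : Int × Int × PySem.Set Int) start =>
        if PySem.Set.contains st.2.2 start then st
        else
          let pr := pvLoopR d pvFuel [start] (PySem.Set.add st.2.2 start) 0 0
          (st.1 + (if pr.1.1 == 1 then (1 : Int) else 0),
           st.2.1 + (if pr.1.2 == 1 then (1 : Int) else 0), pr.2)) (x, y, s)).1
      = (nodes.foldl (fun (st : Int × Int × Array Bool) node =>
          if pvArrGet st.2.2 node true then st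
          else
            let pr := pvParseTree g node st.2.2
            (st.1 + pr.1.1, st.2.1 + pr.1.2, pr.2)) (x, y, v)).1 ∧
    (nodes.foldl (fun (st : Int × Int × PySem.Set Int) start =>
        if PySem.Set.contains st.2.2 start then st
        else
          let pr := pvLoopR d pvFuel [start] (PySem.Set.add st.2.2 start) 0 0
          (st.1 + (if pr.1.1 == 1 then (1 : Int) else 0),
           st.2.1 + (if pr.1.2 == 1 then (1 : Int) else 0), pr.2)) (x, y, s)).2.1
      = (nodes.foldl (fun (st : Int × Int × Array Bool) node =>
          if pvArrGet st.2.2 node true then st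
          else
            let pr := pvParseTree g node st.2.2
            (st.1 + pr.1.1, st.2.1 + pr.1.2, pr.2)) (x, y, v)).2.1 ∧
    pvRelV U (nodes.foldl (fun (st : Int × Int × Array Bool) node =>
          if pvArrGet st.2.2 node true then st
          else
            let pr := pvParseTree g node st.2.2
            (st.1 + pr.1.1, st.2.1 + pr.1.2, pr.2)) (x, y, v)).2.2
      (nodes.foldl (fun (st : Int × Int × PySem.Set Int) start =>
        if PySem.Set.contains st.2.2 start then st
        else
          let pr := pvLoopR d pvFuel [start] (PySem.Set.add st.2.2 start) 0 0
          (st.1 + (if pr.1.1 == 1 then (1 : Int) else 0),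
           st.2.1 + (if pr.1.2 == 1 then (1 : Int) else 0), pr.2)) (x, y, s)).2.2 := by
  intro nodes
  induction nodes with
  | nil => intro _ v s x y hv; exact ⟨rfl, rfl, hv⟩
  | cons n t ih =>
    intro hpre v s x y hv
    have hn : n ∈ U := hpre n (List.mem_cons_self ..)
    have ht : ∀ m ∈ t, m ∈ U := fun m hm => hpre m (List.mem_cons_of_mem _ hm)
    simp only [List.foldl_cons]
    obtain ⟨hn1, hn2⟩ := hU.1 n hn
    have hread : pvArrGet v n true = PySem.Set.contains s n := by
      rw [pvArrGet_u v _ hv.1 hn1 hn2, hv.2 n hn]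
    rw [hread]
    by_cases hvis : PySem.Set.contains s n = true
    · rw [if_pos hvis, if_pos hvis]
      exact ih ht v s x y hv
    · rw [if_neg hvis, if_neg hvis]
      have hv' : pvRelV U (pvArrSet v n true) (PySem.Set.add s n) := pvRelV_mark hU hv hn
      have hsim := pvLoop_sim hU ⟨hg.1, hg.2.1, hg.2.2⟩ pvFuel [n] (pvArrSet v n true)
        (PySem.Set.add s n) [] [] [] [] hv'
        (by intro z hz; rw [List.mem_singleton.mp hz]; exact hn)
      simp only [List.length_nil, Nat.add_zero, Nat.cast_zero] at hsim
      obtain ⟨hc1, hc2, hrv⟩ := hsim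
      simp only [pvParseTree]
      rw [hc1, hc2]
      have hflag : ∀ (a b : Nat), (((a + b : Nat) : Int) == 1) = (a + b == 1) := by
        intro a b
        apply Bool.eq_iff_iff.mpr
        simp only [beq_iff_eq]
        omega
      rw [hflag, hflag]
      exact ih ht _ _ _ _ hrv

-- A equals the dict/set reference on Pre_ inputs
theorem pvA_eq_ARef (nodes : List Int) (edges : List (Int × Int))
    (hpre : Pre_solution nodes edges) : solution nodes edges = pvARef nodes edges := by
  unfold solution pvARef
  have hU : pvOK (pvU nodes edges) := ⟨hpre.1, hpre.2⟩
  have hends : ∀ p ∈ edges, p.1 ∈ pvU nodes edges ∧ p.2 ∈ pvU nodes edges := by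
    intro p hp
    unfold pvU
    constructor <;> refine List.mem_append_right _ (List.mem_flatMap.mpr ⟨p, hp, ?_⟩) <;> simp
  have hg := pvRelG_build hU edges hends
  have hv0 : pvRelV (pvU nodes edges) (Array.replicate 1000001 false) PySem.Set.empty := by
    refine ⟨by simp, ?_⟩
    intro m _
    simp [pvIdx_lt m, PySem.Set.empty]
  have hnodes : ∀ n ∈ nodes, n ∈ pvU nodes edges := fun n hn => List.mem_append_left _ hn
  obtain ⟨h1, h2, _⟩ := pvOuter_sim hU hg nodes hnodes _ _ 0 0 hv0
  simp only []
  rw [← h1, ← h2]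

---------------------------------------------------------------------------
-- Part 1: graph vocabulary — edges as a symmetric step relation, degree = endpoint count.
---------------------------------------------------------------------------

def pvER (edges : List (Int × Int)) (x y : Int) : Prop := (x, y) ∈ edges ∨ (y, x) ∈ edges

def pvConn (edges : List (Int × Int)) : Int → Int → Prop := Relation.ReflTransGen (pvER edges)

def pvEnds (edges : List (Int × Int)) : List Int := edges.flatMap (fun p => [p.1, p.2])

def pvKap (c : PySem.Dict Int Int) (x : Int) : Int := c.getD x x

def pvPS (edges : List (Int × Int)) (v : Int) : Bool :=
  PySem.Int.mod v 2 == PySem.Int.mod (((pvEnds edges).count v : Nat) : Int) 2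

theorem pvER_symm {edges : List (Int × Int)} {x y : Int} (h : pvER edges x y) : pvER edges y x :=
  h.elim .inr .inl

theorem pvConn_symm {edges : List (Int × Int)} {x y : Int} (h : pvConn edges x y) :
    pvConn edges y x :=
  Relation.ReflTransGen.symmetric (fun _ _ => pvER_symm) h

theorem pvER_mem_ends {edges : List (Int × Int)} {x y : Int} (h : pvER edges x y) :
    x ∈ pvEnds edges ∧ y ∈ pvEnds edges := by
  unfold pvEnds
  rcases h with h | h <;>
    exact ⟨List.mem_flatMap.mpr ⟨_, h, by simp⟩, List.mem_flatMap.mpr ⟨_, h, by simp⟩⟩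

-- the adjacency fold, bucket contents in closed form
theorem pvAdj_getD (edges : List (Int × Int)) (d0 : PySem.Dict Int (List Int)) (x : Int) :
    (edges.foldl (fun d p =>
        let d := d.insert p.1 (d.getD p.1 [] ++ [p.2])
        d.insert p.2 (d.getD p.2 [] ++ [p.1])) d0).getD x []
    = d0.getD x [] ++ edges.flatMap (fun p =>
        (if p.1 = x then [p.2] else []) ++ (if p.2 = x then [p.1] else [])) := by
  induction edges generalizing d0 with
  | nil => simp
  | cons p t ih =>
    obtain ⟨a, b⟩ := p
    rw [List.foldl_cons, List.flatMap_cons, ih]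
    by_cases hxb : x = b
    · subst hxb
      by_cases hba : x = a
      · subst hba
        simp [PySem.Dict.getD_insert]
      · have hab : ¬ a = x := fun h => hba h.symm
        simp [PySem.Dict.getD_insert, hba, hab]
    · by_cases hxa : x = a
      · subst hxa
        have hba : ¬ b = x := fun h => hxb h.symm
        simp [PySem.Dict.getD_insert, hxb, hba]
      · have hax : ¬ a = x := fun h => hxa h.symm
        have hbx : ¬ b = x := fun h => hxb h.symm
        simp [PySem.Dict.getD_insert, hxa, hxb, hax, hbx]

theorem pvEnds_count (edges : List (Int × Int)) (x : Int) :
    (edges.flatMap (fun p =>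
        (if p.1 = x then [p.2] else []) ++ (if p.2 = x then [p.1] else []))).length
      = (pvEnds edges).count x := by
  unfold pvEnds
  induction edges with
  | nil => simp
  | cons p t ih =>
    obtain ⟨a, b⟩ := p
    simp only [List.flatMap_cons, List.length_append, ih, List.count_append]
    by_cases h1 : a = x <;> by_cases h2 : b = x <;>
      simp [h1, h2, List.count_cons, List.count_nil, beq_iff_eq, eq_comm] <;> omega

theorem pvAdj_len (edges : List (Int × Int)) (x : Int) :
    ((pvAdj edges).getD x []).length = (pvEnds edges).count x := by
  unfold pvAdj
  rw [pvAdj_getD]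
  simp only [PySem.Dict.getD_empty, List.nil_append]
  exact pvEnds_count edges x

theorem pvAdj_mem {edges : List (Int × Int)} {x y : Int} :
    y ∈ (pvAdj edges).getD x [] ↔ pvER edges x y := by
  unfold pvAdj
  rw [pvAdj_getD]
  simp only [PySem.Dict.getD_empty, List.nil_append, List.mem_flatMap, List.mem_append, pvER]
  constructor
  · rintro ⟨p, hp, h | h⟩
    · rcases Decidable.em (p.1 = x) with h1 | h1
      · left
        have : y = p.2 := by simpa [h1] using h
        subst h1; subst this; exact hp
      · simp [h1] at h
    · rcases Decidable.em (p.2 = x) with h2 | h2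
      · right
        have : y = p.1 := by simpa [h2] using h
        subst h2; subst this; exact hp
      · simp [h2] at h
  · rintro (h | h)
    · exact ⟨(x, y), h, by simp⟩
    · exact ⟨(y, x), h, by simp⟩

-- B's degree dict: extract it from the edge fold, then evaluate it
theorem pvDeg_extract (edges : List (Int × Int))
    (st0 : PySem.Dict Int Int × PySem.Dict Int (List Int) × PySem.Dict Int Int) :
    (edges.foldl (fun st e =>
        let st := pvSeen (pvSeen st e.1) e.2
        let cm := pvMergeB st.1 st.2.1 e.1 e.2
        (cm.1, cm.2, st.2.2)) st0).2.2
    = (pvEnds edges).foldl (fun d x => d.insert x (d.getD x 0 + 1)) st0.2.2 := by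
  induction edges generalizing st0 with
  | nil => rfl
  | cons e t ih =>
    simp only [List.foldl_cons, pvEnds, List.flatMap_cons, List.foldl_append] at *
    rw [ih]
    rcases st0 with ⟨c, m, d⟩
    simp only [pvSeen]
    by_cases h1 : c.contains e.1 <;> simp [h1] <;>
      by_cases h2 : (if c.contains e.1 then (c, m, d)
        else (c.insert e.1 e.1, m.insert e.1 [e.1], d)).1.contains e.2 <;> simp_all [pvEnds]

theorem pvDeg_getD (edges : List (Int × Int)) (v : Int) :
    ((edges.foldl (fun st e =>
        let st := pvSeen (pvSeen st e.1) e.2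
        let cm := pvMergeB st.1 st.2.1 e.1 e.2
        (cm.1, cm.2, st.2.2))
        (PySem.Dict.empty, PySem.Dict.empty, PySem.Dict.empty)).2.2).getD v 0
      = ((pvEnds edges).count v : Int) := by
  rw [pvDeg_extract]
  rw [PySem.Dict.getD_foldl_insert_add_one]
  simp

---------------------------------------------------------------------------
-- Part 2: small Dict facts used by the merging proof.
---------------------------------------------------------------------------

theorem pvGet?_erase {ν : Type} (d : PySem.Dict Int ν) (k x : Int) :
    (d.erase k).get? x = if x = k then none else d.get? x := by
  rcases d with ⟨its⟩
  induction its with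
  | nil => simp [PySem.Dict.erase, PySem.Dict.get?]
  | cons p t ih =>
    by_cases hpk : p.1 = k <;> by_cases hxk : x = k <;> by_cases hpx : p.1 = x <;>
      simp_all [PySem.Dict.erase, PySem.Dict.get?, List.filter_cons, List.find?_cons,
        beq_iff_eq]

theorem pvGetD_erase {ν : Type} (d : PySem.Dict Int ν) (k x : Int) (d0 : ν) :
    (d.erase k).getD x d0 = if x = k then d0 else d.getD x d0 := by
  rw [PySem.Dict.getD_eq_get?_getD, PySem.Dict.getD_eq_get?_getD, pvGet?_erase]
  split_ifs <;> rfl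

theorem pvGetD_contains_irrel {ν : Type} (d : PySem.Dict Int ν) (k : Int) (a b : ν)
    (h : d.contains k = true) : d.getD k a = d.getD k b := by
  rw [PySem.Dict.getD_eq_get?_getD, PySem.Dict.getD_eq_get?_getD]
  rw [PySem.Dict.contains_eq_isSome_get?] at h
  cases hg : d.get? k with
  | none => rw [hg] at h; simp at h
  | some v => simp

-- a fold of constant-value inserts, pointwise
theorem pvFoldl_insert_const_getD (l : List Int) (c : PySem.Dict Int Int) (v x d0 : Int) :
    (l.foldl (fun c m => c.insert m v) c).getD x d0
      = if x ∈ l then v else c.getD x d0 := by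
  induction l generalizing c with
  | nil => simp
  | cons m t ih =>
    simp only [List.foldl_cons, ih, List.mem_cons, PySem.Dict.getD_insert]
    by_cases hx : x ∈ t <;> by_cases hm : x = m <;> simp [hx, hm]

theorem pvFoldl_insert_const_contains (l : List Int) (c : PySem.Dict Int Int) (v x : Int) :
    (l.foldl (fun c m => c.insert m v) c).contains x
      = (decide (x ∈ l) || c.contains x) := by
  induction l generalizing c with
  | nil => simp
  | cons m t ih =>
    simp only [List.foldl_cons, ih, List.mem_cons, PySem.Dict.contains_insert]
    by_cases hx : x ∈ t <;> by_cases hm : x = m <;> simp [hx, hm]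

---------------------------------------------------------------------------
-- Part 3: the merging invariant and the edge/node folds of B.
---------------------------------------------------------------------------

def pvBInv (edges : List (Int × Int)) (c : PySem.Dict Int Int)
    (m : PySem.Dict Int (List Int)) : Prop :=
  c.keys.Nodup ∧
  (∀ x, c.contains x = true → pvConn edges x (pvKap c x) ∧ c.contains (pvKap c x) = true) ∧
  (∀ l x, x ∈ m.getD l [] ↔ (c.contains x = true ∧ pvKap c x = l))

-- ensuring presence of one id
theorem pvEnsure_spec {edges : List (Int × Int)} {c : PySem.Dict Int Int}
    {m : PySem.Dict Int (List Int)} (v : Int) (h : pvBInv edges c m) :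
    pvBInv edges (if c.contains v then c else c.insert v v)
        (if c.contains v then m else m.insert v [v]) ∧
    (∀ x, (if c.contains v then c else c.insert v v).contains x = true
        ↔ (c.contains x = true ∨ x = v)) ∧
    (∀ x, c.contains x = true →
        pvKap (if c.contains v then c else c.insert v v) x = pvKap c x) := by
  by_cases hv : c.contains v = true
  · rw [if_pos hv, if_pos hv]
    exact ⟨h, fun x => ⟨Or.inl, fun hx => hx.elim id (fun he => he ▸ hv)⟩, fun _ _ => rfl⟩
  · simp only [hv, if_false, Bool.false_eq_true]
    obtain ⟨hnd, hconn, hmem⟩ := h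
    have hxv : ∀ x, x ≠ v → pvKap (c.insert v v) x = pvKap c x := by
      intro x hx
      unfold pvKap
      rw [PySem.Dict.getD_insert, if_neg hx]
    have hkapv : pvKap (c.insert v v) v = v := by
      unfold pvKap
      rw [PySem.Dict.getD_insert, if_pos rfl]
    have hcts : ∀ x, (c.insert v v).contains x = true ↔ (c.contains x = true ∨ x = v) := by
      intro x
      rw [PySem.Dict.contains_insert]
      simp [or_comm]
    refine ⟨⟨?_, ?_, ?_⟩, hcts, ?_⟩
    · exact PySem.Dict.nodup_keys_insert c v v hnd
    · intro x hx
      rcases (hcts x).mp hx with hcx | rfl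
      · have hxv' : x ≠ v := fun he => hv (he ▸ hcx)
        rw [hxv x hxv']
        refine ⟨(hconn x hcx).1, ?_⟩
        exact (hcts _).mpr (Or.inl (hconn x hcx).2)
      · rw [hkapv]
        exact ⟨Relation.ReflTransGen.refl, hx⟩
    · intro l x
      rw [PySem.Dict.getD_insert]
      by_cases hl : l = v
      · rw [if_pos hl]
        constructor
        · intro hx
          have hx' : x = v := by simpa using hx
          refine ⟨(hcts x).mpr (Or.inr hx'), ?_⟩
          rw [hx', hkapv]
          exact hl.symm
        · rintro ⟨hcx, hk⟩
          rcases (hcts x).mp hcx with hcx' | hxv2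
          · exfalso
            have hxv' : x ≠ v := fun he => hv (he ▸ hcx')
            rw [hxv x hxv'] at hk
            apply hv
            exact (hk.trans hl) ▸ (hconn x hcx').2
          · simp [hxv2]
      · rw [if_neg hl]
        rw [hmem l x]
        constructor
        · rintro ⟨hcx, hk⟩
          have hxv' : x ≠ v := fun he => hv (he ▸ hcx)
          exact ⟨(hcts x).mpr (Or.inl hcx), by rw [hxv x hxv']; exact hk⟩
        · rintro ⟨hcx, hk⟩
          rcases (hcts x).mp hcx with hcx' | rfl
          · have hxv' : x ≠ v := fun he => hv (he ▸ hcx')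
            rw [hxv x hxv'] at hk
            exact ⟨hcx', hk⟩
          · rw [hkapv] at hk
            exact absurd hk.symm hl
    · intro x hcx
      have hxv' : x ≠ v := fun he => hv (he ▸ hcx)
      exact hxv x hxv'

-- relabeling the whole class of w2 to the label w1
theorem pvRelabel_spec {edges : List (Int × Int)} {c : PySem.Dict Int Int}
    {m : PySem.Dict Int (List Int)} (w1 w2 : Int) (h : pvBInv edges c m) (hne : w2 ≠ w1)
    (hcw1 : c.contains w1 = true) (hconn : pvConn edges w2 w1) :
    pvBInv edges ((m.getD w2 []).foldl (fun c x => c.insert x w1) c)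
      ((m.erase w2).insert w1 ((m.erase w2).getD w1 [] ++ m.getD w2 [])) ∧
    (∀ x, ((m.getD w2 []).foldl (fun c x => c.insert x w1) c).contains x = c.contains x) ∧
    (∀ x, c.contains x = true → pvKap ((m.getD w2 []).foldl (fun c x => c.insert x w1) c) x
        = if pvKap c x = w2 then w1 else pvKap c x) := by
  obtain ⟨hnd, hcn, hmm⟩ := h
  have hmv : ∀ x, x ∈ m.getD w2 [] ↔ (c.contains x = true ∧ pvKap c x = w2) := fun x => hmm w2 x
  have hkap' : ∀ x, pvKap ((m.getD w2 []).foldl (fun c x => c.insert x w1) c) x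
      = if x ∈ m.getD w2 [] then w1 else pvKap c x := by
    intro x
    unfold pvKap
    exact pvFoldl_insert_const_getD _ _ _ _ _
  have hcts : ∀ x, ((m.getD w2 []).foldl (fun c x => c.insert x w1) c).contains x
      = c.contains x := by
    intro x
    rw [pvFoldl_insert_const_contains]
    by_cases hx : x ∈ m.getD w2 []
    · simp [hx, ((hmv x).mp hx).1]
    · simp [hx]
  have hkap2 : ∀ x, c.contains x = true →
      pvKap ((m.getD w2 []).foldl (fun c x => c.insert x w1) c) x
        = if pvKap c x = w2 then w1 else pvKap c x := by
    intro x hx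
    rw [hkap' x]
    by_cases hk : pvKap c x = w2
    · rw [if_pos ((hmv x).mpr ⟨hx, hk⟩), if_pos hk]
    · rw [if_neg (fun hm => hk ((hmv x).mp hm).2), if_neg hk]
  have hgm : ∀ l, ((m.erase w2).insert w1 ((m.erase w2).getD w1 [] ++ m.getD w2 [])).getD l []
      = if l = w1 then m.getD w1 [] ++ m.getD w2 []
        else if l = w2 then [] else m.getD l [] := by
    intro l
    rw [PySem.Dict.getD_insert]
    by_cases hl1 : l = w1
    · rw [if_pos hl1, if_pos hl1, pvGetD_erase, if_neg (fun (he : w1 = w2) => hne he.symm)]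
    · rw [if_neg hl1, if_neg hl1, pvGetD_erase]
  refine ⟨⟨?_, ?_, ?_⟩, hcts, hkap2⟩
  · exact PySem.Dict.nodup_keys_foldl_insert _ (fun _ _ => w1) _ hnd
  · intro x hx
    rw [hcts] at hx
    rw [hkap2 x hx]
    by_cases hk : pvKap c x = w2
    · rw [if_pos hk]
      refine ⟨Relation.ReflTransGen.trans (hk ▸ (hcn x hx).1) hconn, ?_⟩
      rw [hcts]
      exact hcw1
    · rw [if_neg hk]
      refine ⟨(hcn x hx).1, ?_⟩
      rw [hcts]
      exact (hcn x hx).2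
  · intro l x
    rw [hgm l]
    by_cases hl1 : l = w1
    · subst hl1
      rw [if_pos rfl, List.mem_append, hmm l x, hmv x, hcts]
      constructor
      · rintro (⟨hcx, hk⟩ | ⟨hcx, hk⟩)
        · exact ⟨hcx, by rw [hkap2 x hcx, hk, if_neg (fun (he : l = w2) => hne he.symm)]⟩
        · exact ⟨hcx, by rw [hkap2 x hcx, hk, if_pos rfl]⟩
      · rintro ⟨hcx, hk⟩
        rw [hkap2 x hcx] at hk
        by_cases hk2 : pvKap c x = w2
        · exact Or.inr ⟨hcx, hk2⟩
        · rw [if_neg hk2] at hk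
          exact Or.inl ⟨hcx, hk⟩
    · rw [if_neg hl1]
      by_cases hl2 : l = w2
      · subst hl2
        rw [if_pos rfl, hcts]
        simp only [List.not_mem_nil, false_iff]
        rintro ⟨hcx, hk⟩
        rw [hkap2 x hcx] at hk
        by_cases hk2 : pvKap c x = l
        · rw [if_pos hk2] at hk
          exact hl1 hk.symm
        · rw [if_neg hk2] at hk
          exact hk2 hk
      · rw [if_neg hl2, hmm l x, hcts]
        constructor
        · rintro ⟨hcx, hk⟩
          refine ⟨hcx, ?_⟩
          rw [hkap2 x hcx, hk, if_neg hl2]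
        · rintro ⟨hcx, hk⟩
          rw [hkap2 x hcx] at hk
          by_cases hk2 : pvKap c x = w2
          · rw [if_pos hk2] at hk
            exact absurd hk.symm hl1
          · rw [if_neg hk2] at hk
            exact ⟨hcx, hk⟩

-- merging the two classes of an edge
theorem pvMerge_spec {edges : List (Int × Int)} {c : PySem.Dict Int Int}
    {m : PySem.Dict Int (List Int)} {a b : Int} (h : pvBInv edges c m)
    (ha : c.contains a = true) (hb : c.contains b = true) (hab : pvER edges a b) :
    pvBInv edges (pvMergeB c m a b).1 (pvMergeB c m a b).2 ∧
    (∀ x, (pvMergeB c m a b).1.contains x = c.contains x) ∧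
    pvKap (pvMergeB c m a b).1 a = pvKap (pvMergeB c m a b).1 b ∧
    (∀ x y, c.contains x = true → c.contains y = true → pvKap c x = pvKap c y →
      pvKap (pvMergeB c m a b).1 x = pvKap (pvMergeB c m a b).1 y) := by
  by_cases heq : pvKap c a = pvKap c b
  · have hbeq : (c.getD a a == c.getD b b) = true := by
      simpa [pvKap] using heq
    have hred : pvMergeB c m a b = (c, m) := by
      simp only [pvMergeB, hbeq, if_true]
    rw [hred]
    exact ⟨h, fun _ => rfl, heq, fun x y _ _ hxy => hxy⟩
  · have hbeq : (c.getD a a == c.getD b b) = false := by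
      simpa [pvKap] using heq
    set w := if (m.getD (c.getD a a) []).length < (m.getD (c.getD b b) []).length
        then (c.getD b b, c.getD a a) else (c.getD a a, c.getD b b) with hw
    have hred : pvMergeB c m a b
        = ((m.getD w.2 []).foldl (fun c x => c.insert x w.1) c,
           (m.erase w.2).insert w.1 ((m.erase w.2).getD w.1 [] ++ m.getD w.2 [])) := by
      simp only [pvMergeB, hbeq, Bool.false_eq_true, if_false, ← hw]
    have hca : c.contains (pvKap c a) = true := (h.2.1 a ha).2
    have hcb : c.contains (pvKap c b) = true := (h.2.1 b hb).2
    have hconnab : pvConn edges (pvKap c a) (pvKap c b) := by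
      refine Relation.ReflTransGen.trans (pvConn_symm (h.2.1 a ha).1) ?_
      exact Relation.ReflTransGen.trans (Relation.ReflTransGen.single hab) (h.2.1 b hb).1
    have hwcases : (w.1 = pvKap c a ∧ w.2 = pvKap c b) ∨ (w.1 = pvKap c b ∧ w.2 = pvKap c a) := by
      rw [hw]
      unfold pvKap
      split_ifs
      · right; exact ⟨rfl, rfl⟩
      · left; exact ⟨rfl, rfl⟩
    have hne : w.2 ≠ w.1 := by
      rcases hwcases with ⟨h1, h2⟩ | ⟨h1, h2⟩ <;> rw [h1, h2] <;>
        [exact (fun he => heq he.symm); exact heq]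
    have hcw1 : c.contains w.1 = true := by
      rcases hwcases with ⟨h1, _⟩ | ⟨h1, _⟩ <;> rw [h1] <;> [exact hca; exact hcb]
    have hcw2 : pvConn edges w.2 w.1 := by
      rcases hwcases with ⟨h1, h2⟩ | ⟨h1, h2⟩ <;> rw [h1, h2]
      · exact pvConn_symm hconnab
      · exact hconnab
    obtain ⟨hinv, hcts, hkap⟩ := pvRelabel_spec (edges := edges) w.1 w.2 h hne hcw1 hcw2
    rw [hred]
    refine ⟨hinv, hcts, ?_, ?_⟩
    · simp only []
      rw [hkap a ha, hkap b hb]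
      rcases hwcases with ⟨h1, h2⟩ | ⟨h1, h2⟩
      · rw [if_neg (fun he => heq (he.trans h2)), if_pos h2.symm, h1]
      · rw [if_pos h2.symm, if_neg (fun he => heq (he.trans h2).symm), h1]
    · intro x y hx hy hxy
      simp only []
      rw [hkap x hx, hkap y hy, hxy]

-- pvSeen's comp/members components are exactly the ensure step
theorem pvSeen_spec {edges : List (Int × Int)}
    (st : PySem.Dict Int Int × PySem.Dict Int (List Int) × PySem.Dict Int Int) (v : Int)
    (h : pvBInv edges st.1 st.2.1) :
    pvBInv edges (pvSeen st v).1 (pvSeen st v).2.1 ∧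
    (∀ x, (pvSeen st v).1.contains x = true ↔ (st.1.contains x = true ∨ x = v)) ∧
    (∀ x, st.1.contains x = true → pvKap (pvSeen st v).1 x = pvKap st.1 x) := by
  have base := pvEnsure_spec (edges := edges) (c := st.1) (m := st.2.1) v h
  by_cases hv : st.1.contains v = true
  · simpa [pvSeen, hv] using base
  · simpa [pvSeen, hv] using base

-- one step of the node-ensuring fold
theorem pvNBody_spec {edges : List (Int × Int)}
    (cm : PySem.Dict Int Int × PySem.Dict Int (List Int)) (n : Int)
    (h : pvBInv edges cm.1 cm.2) :
    pvBInv edges (if cm.1.contains n then cm else (cm.1.insert n n, cm.2.insert n [n])).1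
        (if cm.1.contains n then cm else (cm.1.insert n n, cm.2.insert n [n])).2 ∧
    (∀ x, (if cm.1.contains n then cm else (cm.1.insert n n, cm.2.insert n [n])).1.contains x = true
        ↔ (cm.1.contains x = true ∨ x = n)) ∧
    (∀ x, cm.1.contains x = true →
        pvKap (if cm.1.contains n then cm else (cm.1.insert n n, cm.2.insert n [n])).1 x
          = pvKap cm.1 x) := by
  have base := pvEnsure_spec (edges := edges) (c := cm.1) (m := cm.2) n h
  by_cases hv : cm.1.contains n = true
  · simpa [hv] using base
  · simpa [hv] using base

-- the whole edge fold
theorem pvFoldE_spec (edges : List (Int × Int)) :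
    ∀ (es : List (Int × Int)) (st : PySem.Dict Int Int × PySem.Dict Int (List Int) × PySem.Dict Int Int),
    (∀ p ∈ es, p ∈ edges) → pvBInv edges st.1 st.2.1 →
    pvBInv edges (es.foldl (fun st e =>
        let st := pvSeen (pvSeen st e.1) e.2
        let cm := pvMergeB st.1 st.2.1 e.1 e.2
        (cm.1, cm.2, st.2.2)) st).1
      (es.foldl (fun st e =>
        let st := pvSeen (pvSeen st e.1) e.2
        let cm := pvMergeB st.1 st.2.1 e.1 e.2
        (cm.1, cm.2, st.2.2)) st).2.1 ∧
    (∀ x, (es.foldl (fun st e =>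
        let st := pvSeen (pvSeen st e.1) e.2
        let cm := pvMergeB st.1 st.2.1 e.1 e.2
        (cm.1, cm.2, st.2.2)) st).1.contains x = true
      ↔ (st.1.contains x = true ∨ x ∈ pvEnds es)) ∧
    (∀ x y, st.1.contains x = true → st.1.contains y = true → pvKap st.1 x = pvKap st.1 y →
      pvKap (es.foldl (fun st e =>
        let st := pvSeen (pvSeen st e.1) e.2
        let cm := pvMergeB st.1 st.2.1 e.1 e.2
        (cm.1, cm.2, st.2.2)) st).1 x
      = pvKap (es.foldl (fun st e =>
        let st := pvSeen (pvSeen st e.1) e.2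
        let cm := pvMergeB st.1 st.2.1 e.1 e.2
        (cm.1, cm.2, st.2.2)) st).1 y) ∧
    (∀ p ∈ es, pvKap (es.foldl (fun st e =>
        let st := pvSeen (pvSeen st e.1) e.2
        let cm := pvMergeB st.1 st.2.1 e.1 e.2
        (cm.1, cm.2, st.2.2)) st).1 p.1
      = pvKap (es.foldl (fun st e =>
        let st := pvSeen (pvSeen st e.1) e.2
        let cm := pvMergeB st.1 st.2.1 e.1 e.2
        (cm.1, cm.2, st.2.2)) st).1 p.2) := by
  intro es
  induction es with
  | nil =>
    intro st _ h
    refine ⟨h, fun x => ?_, fun x y _ _ hxy => hxy, fun p hp => absurd hp (List.not_mem_nil)⟩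
    simp [pvEnds]
  | cons e t ih =>
    intro st hes h
    have he : e ∈ edges := hes e (List.mem_cons_self ..)
    obtain ⟨hS1, hS1c, hS1k⟩ := pvSeen_spec (edges := edges) st e.1 h
    obtain ⟨hS2, hS2c, hS2k⟩ := pvSeen_spec (edges := edges) (pvSeen st e.1) e.2 hS1
    have hce1 : (pvSeen (pvSeen st e.1) e.2).1.contains e.1 = true :=
      (hS2c e.1).mpr (Or.inl ((hS1c e.1).mpr (Or.inr rfl)))
    have hce2 : (pvSeen (pvSeen st e.1) e.2).1.contains e.2 = true :=
      (hS2c e.2).mpr (Or.inr rfl)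
    have hER : pvER edges e.1 e.2 := Or.inl he
    obtain ⟨hM, hMc, hMk12, hMpres⟩ :=
      pvMerge_spec (edges := edges) (a := e.1) (b := e.2) hS2 hce1 hce2 hER
    have hup : ∀ x, st.1.contains x = true →
        (pvSeen (pvSeen st e.1) e.2).1.contains x = true :=
      fun x hx => (hS2c x).mpr (Or.inl ((hS1c x).mpr (Or.inl hx)))
    have hkup : ∀ x y, st.1.contains x = true → st.1.contains y = true →
        pvKap st.1 x = pvKap st.1 y →
        pvKap (pvMergeB (pvSeen (pvSeen st e.1) e.2).1 (pvSeen (pvSeen st e.1) e.2).2.1 e.1 e.2).1 x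
          = pvKap (pvMergeB (pvSeen (pvSeen st e.1) e.2).1 (pvSeen (pvSeen st e.1) e.2).2.1 e.1 e.2).1 y := by
      intro x y hx hy hxy
      refine hMpres x y (hup x hx) (hup y hy) ?_
      rw [hS2k x ((hS1c x).mpr (Or.inl hx)), hS2k y ((hS1c y).mpr (Or.inl hy)),
        hS1k x hx, hS1k y hy]
      exact hxy
    simp only [List.foldl_cons]
    obtain ⟨hI, hIc, hIk, hIe⟩ := ih
      ((pvMergeB (pvSeen (pvSeen st e.1) e.2).1 (pvSeen (pvSeen st e.1) e.2).2.1 e.1 e.2).1,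
       (pvMergeB (pvSeen (pvSeen st e.1) e.2).1 (pvSeen (pvSeen st e.1) e.2).2.1 e.1 e.2).2,
       (pvSeen (pvSeen st e.1) e.2).2.2)
      (fun p hp => hes p (List.mem_cons_of_mem _ hp)) hM
    refine ⟨hI, ?_, ?_, ?_⟩
    · intro x
      rw [hIc x]
      have : (pvMergeB (pvSeen (pvSeen st e.1) e.2).1 (pvSeen (pvSeen st e.1) e.2).2.1 e.1 e.2).1.contains x
          = (pvSeen (pvSeen st e.1) e.2).1.contains x := hMc x
      rw [this, hS2c x, hS1c x]
      simp only [pvEnds, List.flatMap_cons, List.mem_append, List.mem_cons,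
        List.not_mem_nil, or_false, List.mem_flatMap]
      constructor
      · rintro (((hx | hx) | hx) | hx)
        · exact Or.inl hx
        · exact Or.inr (Or.inl (Or.inl hx))
        · exact Or.inr (Or.inl (Or.inr hx))
        · exact Or.inr (Or.inr hx)
      · rintro (hx | ((hx | hx) | hx))
        · exact Or.inl (Or.inl (Or.inl hx))
        · exact Or.inl (Or.inl (Or.inr hx))
        · exact Or.inl (Or.inr hx)
        · exact Or.inr hx
    · intro x y hx hy hxy
      exact hIk x y ((hMc x).trans (hup x hx)) ((hMc y).trans (hup y hy)) (hkup x y hx hy hxy)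
    · intro p hp
      rcases List.mem_cons.mp hp with rfl | hp
      · exact hIk p.1 p.2 ((hMc p.1).trans hce1) ((hMc p.2).trans hce2) hMk12
      · exact hIe p hp

-- the node-ensuring fold
theorem pvFoldN_spec (edges : List (Int × Int)) :
    ∀ (ns : List Int) (cm : PySem.Dict Int Int × PySem.Dict Int (List Int)),
    pvBInv edges cm.1 cm.2 →
    pvBInv edges (ns.foldl (fun (cm : PySem.Dict Int Int × PySem.Dict Int (List Int)) n =>
        if cm.1.contains n then cm else (cm.1.insert n n, cm.2.insert n [n])) cm).1
      (ns.foldl (fun (cm : PySem.Dict Int Int × PySem.Dict Int (List Int)) n =>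
        if cm.1.contains n then cm else (cm.1.insert n n, cm.2.insert n [n])) cm).2 ∧
    (∀ x, (ns.foldl (fun (cm : PySem.Dict Int Int × PySem.Dict Int (List Int)) n =>
        if cm.1.contains n then cm else (cm.1.insert n n, cm.2.insert n [n])) cm).1.contains x = true
      ↔ (cm.1.contains x = true ∨ x ∈ ns)) ∧
    (∀ x, cm.1.contains x = true →
      pvKap (ns.foldl (fun (cm : PySem.Dict Int Int × PySem.Dict Int (List Int)) n =>
        if cm.1.contains n then cm else (cm.1.insert n n, cm.2.insert n [n])) cm).1 x
      = pvKap cm.1 x) := by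
  intro ns
  induction ns with
  | nil =>
    intro cm h
    exact ⟨h, fun x => by simp, fun x _ => rfl⟩
  | cons n t ih =>
    intro cm h
    obtain ⟨hB, hBc, hBk⟩ := pvNBody_spec (edges := edges) cm n h
    simp only [List.foldl_cons]
    obtain ⟨hI, hIc, hIk⟩ :=
      ih (if cm.1.contains n then cm else (cm.1.insert n n, cm.2.insert n [n])) hB
    refine ⟨hI, ?_, ?_⟩
    · intro x
      rw [hIc x, hBc x]
      simp only [List.mem_cons]
      tauto
    · intro x hx
      rw [hIk x ((hBc x).mpr (Or.inl hx)), hBk x hx]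

---------------------------------------------------------------------------
-- Part 4: the final label map and its characterization.
---------------------------------------------------------------------------

-- the final comp dict of B
def pvComp (nodes : List Int) (edges : List (Int × Int)) : PySem.Dict Int Int :=
  let st := edges.foldl (fun st e =>
      let st := pvSeen (pvSeen st e.1) e.2
      let cm := pvMergeB st.1 st.2.1 e.1 e.2
      (cm.1, cm.2, st.2.2)) (PySem.Dict.empty, PySem.Dict.empty, PySem.Dict.empty)
  (nodes.foldl (fun (cm : PySem.Dict Int Int × PySem.Dict Int (List Int)) n =>
      if cm.1.contains n then cm else (cm.1.insert n n, cm.2.insert n [n])) (st.1, st.2.1)).1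

theorem pvComp_spec (nodes : List Int) (edges : List (Int × Int)) :
    (pvComp nodes edges).keys.Nodup ∧
    (∀ x, (pvComp nodes edges).contains x = true ↔ (x ∈ pvEnds edges ∨ x ∈ nodes)) ∧
    (∀ x, (pvComp nodes edges).contains x = true →
      pvConn edges x (pvKap (pvComp nodes edges) x) ∧
      (pvComp nodes edges).contains (pvKap (pvComp nodes edges) x) = true) ∧
    (∀ p ∈ edges, pvKap (pvComp nodes edges) p.1 = pvKap (pvComp nodes edges) p.2) := by
  have hbase : pvBInv edges (PySem.Dict.empty : PySem.Dict Int Int)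
      (PySem.Dict.empty : PySem.Dict Int (List Int)) := by
    refine ⟨PySem.Dict.nodup_keys_empty, ?_, ?_⟩
    · intro x hx
      rw [PySem.Dict.contains_empty] at hx
      exact absurd hx (by simp)
    · intro l x
      rw [PySem.Dict.getD_empty]
      simp [PySem.Dict.contains_empty]
  obtain ⟨hE, hEc, hEk, hEe⟩ := pvFoldE_spec edges edges
    (PySem.Dict.empty, PySem.Dict.empty, PySem.Dict.empty) (fun p hp => hp) hbase
  obtain ⟨hN, hNc, hNk⟩ := pvFoldN_spec edges nodes (_, _) hE
  refine ⟨hN.1, ?_, hN.2.1, ?_⟩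
  · intro x
    unfold pvComp
    rw [hNc x, hEc x]
    simp [PySem.Dict.contains_empty]
  · intro p hp
    have h1 := pvER_mem_ends (Or.inl hp : pvER edges p.1 p.2)
    have hc1 : _ := (hEc p.1).mpr (Or.inr h1.1)
    have hc2 : _ := (hEc p.2).mpr (Or.inr h1.2)
    show pvKap (pvComp nodes edges) p.1 = pvKap (pvComp nodes edges) p.2
    unfold pvComp
    rw [hNk p.1 hc1, hNk p.2 hc2]
    exact hEe p hp

-- equal labels = connected (on present ids)
theorem pvKap_eq_iff_conn (nodes : List Int) (edges : List (Int × Int)) {x y : Int}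
    (hx : (pvComp nodes edges).contains x = true)
    (hy : (pvComp nodes edges).contains y = true) :
    pvKap (pvComp nodes edges) x = pvKap (pvComp nodes edges) y ↔ pvConn edges x y := by
  obtain ⟨_, _, hcn, hed⟩ := pvComp_spec nodes edges
  constructor
  · intro hk
    refine Relation.ReflTransGen.trans (hcn x hx).1 ?_
    rw [hk]
    exact pvConn_symm (hcn y hy).1
  · intro hconn
    clear hx hy
    induction hconn with
    | refl => rfl
    | tail h1 h2 ih =>
      rw [ih]
      rcases h2 with h2 | h2
      · exact hed _ h2
      · exact (hed _ h2).symm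

---------------------------------------------------------------------------
-- Part 5: DFS characterization of the reference loop.
---------------------------------------------------------------------------

theorem pvFilterLen_drop {y : Int} {vis : List Int} (UA : List Int) (hUA : UA.Nodup)
    (hy : y ∈ UA) (hny : y ∉ vis) :
    (UA.filter (fun x => !(decide (x ∈ vis ++ [y])))).length + 1
      = (UA.filter (fun x => !(decide (x ∈ vis)))).length := by
  induction UA with
  | nil => exact absurd hy (List.not_mem_nil)
  | cons u t ih =>
    have hnd := List.nodup_cons.mp hUA
    rcases List.mem_cons.mp hy with he | hyt
    · subst he
      have h1 : (!(decide (y ∈ vis ++ [y]))) = false := by simp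
      have h2 : (!(decide (y ∈ vis))) = true := by simp [hny]
      rw [List.filter_cons, List.filter_cons, h1, h2]
      have heq : t.filter (fun x => !(decide (x ∈ vis ++ [y])))
          = t.filter (fun x => !(decide (x ∈ vis))) := by
        apply List.filter_congr
        intro x hxt
        have hxu : x ≠ y := fun he2 => hnd.1 (he2 ▸ hxt)
        simp [hxu]
      rw [heq]
      simp only [Bool.false_eq_true, if_false, eq_self_iff_true, if_true, List.length_cons]
    · have hyu : y ≠ u := fun he => hnd.1 (he ▸ hyt)
      rw [List.filter_cons, List.filter_cons]
      have heq : (!(decide (u ∈ vis ++ [y]))) = (!(decide (u ∈ vis))) := by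
        have huy : u ≠ y := fun he => hyu he.symm
        simp [huy]
      rw [heq]
      have hrec := ih hnd.2 hyt
      by_cases hu : u ∈ vis
      · have hu' : (!(decide (u ∈ vis))) = false := by simp [hu]
        rw [hu']
        simp only [Bool.false_eq_true, if_false]
        exact hrec
      · have hu' : (!(decide (u ∈ vis))) = true := by simp [hu]
        rw [hu']
        simp only [eq_self_iff_true, if_true, List.length_cons]
        omega

-- the child-pushing fold of the reference loop
theorem pvPush_spec (adj : PySem.Dict Int (List Int)) (nbrs : List Int) :
    ∀ (vis : PySem.Set Int) (st : List Int), vis.Nodup → st.Nodup → (∀ x ∈ st, x ∈ vis) →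
    (nbrs.foldl (fun (p : PySem.Set Int × List Int) c =>
        if PySem.Set.contains p.1 c then p else (PySem.Set.add p.1 c, c :: p.2)) (vis, st)).1.Nodup ∧
    (∀ x, x ∈ (nbrs.foldl (fun (p : PySem.Set Int × List Int) c =>
        if PySem.Set.contains p.1 c then p else (PySem.Set.add p.1 c, c :: p.2)) (vis, st)).1
      ↔ (x ∈ vis ∨ x ∈ nbrs)) ∧
    (∀ x, x ∈ (nbrs.foldl (fun (p : PySem.Set Int × List Int) c =>
        if PySem.Set.contains p.1 c then p else (PySem.Set.add p.1 c, c :: p.2)) (vis, st)).2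
      ↔ (x ∈ st ∨ (x ∈ nbrs ∧ x ∉ vis))) ∧
    (nbrs.foldl (fun (p : PySem.Set Int × List Int) c =>
        if PySem.Set.contains p.1 c then p else (PySem.Set.add p.1 c, c :: p.2)) (vis, st)).2.Nodup ∧
    (∀ x ∈ (nbrs.foldl (fun (p : PySem.Set Int × List Int) c =>
        if PySem.Set.contains p.1 c then p else (PySem.Set.add p.1 c, c :: p.2)) (vis, st)).2,
      x ∈ (nbrs.foldl (fun (p : PySem.Set Int × List Int) c =>
        if PySem.Set.contains p.1 c then p else (PySem.Set.add p.1 c, c :: p.2)) (vis, st)).1) ∧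
    (∀ (UA : List Int), UA.Nodup → (∀ y ∈ nbrs, y ∈ UA) →
      (nbrs.foldl (fun (p : PySem.Set Int × List Int) c =>
        if PySem.Set.contains p.1 c then p else (PySem.Set.add p.1 c, c :: p.2)) (vis, st)).2.length
        + (UA.filter (fun x => !(decide (x ∈ (nbrs.foldl (fun (p : PySem.Set Int × List Int) c =>
            if PySem.Set.contains p.1 c then p else (PySem.Set.add p.1 c, c :: p.2)) (vis, st)).1)))).length
      = st.length + (UA.filter (fun x => !(decide (x ∈ vis)))).length) := by
  induction nbrs with
  | nil =>
    intro vis st hv hst hsub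
    exact ⟨hv, fun x => by simp, fun x => by simp, hst, fun x hx => hsub x hx,
      fun UA _ _ => rfl⟩
  | cons c t ih =>
    intro vis st hv hst hsub
    simp only [List.foldl_cons]
    by_cases hc : PySem.Set.contains vis c = true
    · rw [if_pos hc]
      have hcv : c ∈ vis := (PySem.Set.contains_iff vis c).mp hc
      obtain ⟨i1, i2, i3, i4, i5, i6⟩ := ih vis st hv hst hsub
      refine ⟨i1, ?_, ?_, i4, i5, ?_⟩
      · intro x
        rw [i2 x]
        simp only [List.mem_cons]
        constructor
        · rintro (hx | hx)
          · exact Or.inl hx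
          · exact Or.inr (Or.inr hx)
        · rintro (hx | (rfl | hx))
          · exact Or.inl hx
          · exact Or.inl hcv
          · exact Or.inr hx
      · intro x
        rw [i3 x]
        simp only [List.mem_cons]
        constructor
        · rintro (hx | ⟨hx1, hx2⟩)
          · exact Or.inl hx
          · exact Or.inr ⟨Or.inr hx1, hx2⟩
        · rintro (hx | ⟨(rfl | hx1), hx2⟩)
          · exact Or.inl hx
          · exact absurd hcv hx2
          · exact Or.inr ⟨hx1, hx2⟩
      · intro UA hUA hUAm
        exact i6 UA hUA (fun y hy => hUAm y (List.mem_cons_of_mem _ hy))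
    · rw [if_neg hc]
      have hcv : c ∉ vis := fun hm => hc ((PySem.Set.contains_iff vis c).mpr hm)
      have hadd : PySem.Set.add vis c = vis ++ [c] := PySem.Set.add_of_not_mem hcv
      have hv' : (PySem.Set.add vis c).Nodup := PySem.Set.nodup_add vis c hv
      have hst' : (c :: st).Nodup :=
        List.nodup_cons.mpr ⟨fun hcs => hcv (hsub c hcs), hst⟩
      have hsub' : ∀ x ∈ (c :: st), x ∈ PySem.Set.add vis c := by
        intro x hx
        rcases List.mem_cons.mp hx with rfl | hx
        · exact (PySem.Set.mem_add vis x x).mpr (Or.inr rfl)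
        · exact (PySem.Set.mem_add vis c x).mpr (Or.inl (hsub x hx))
      obtain ⟨i1, i2, i3, i4, i5, i6⟩ := ih (PySem.Set.add vis c) (c :: st) hv' hst' hsub'
      refine ⟨i1, ?_, ?_, i4, i5, ?_⟩
      · intro x
        rw [i2 x]
        rw [PySem.Set.mem_add]
        simp only [List.mem_cons]
        tauto
      · intro x
        rw [i3 x]
        simp only [List.mem_cons, PySem.Set.mem_add]
        constructor
        · rintro ((rfl | hx) | ⟨hx1, hx2⟩)
          · exact Or.inr ⟨Or.inl rfl, hcv⟩
          · exact Or.inl hx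
          · exact Or.inr ⟨Or.inr hx1, fun hxv => hx2 (Or.inl hxv)⟩
        · rintro (hx | ⟨(rfl | hx1), hx2⟩)
          · exact Or.inl (Or.inr hx)
          · exact Or.inl (Or.inl rfl)
          · by_cases hxc : x = c
            · exact Or.inl (Or.inl hxc)
            · refine Or.inr ⟨hx1, fun hmem2 => ?_⟩
              rcases hmem2 with h | h
              · exact hx2 h
              · exact hxc h
      · intro UA hUA hUAm
        have h6 := i6 UA hUA (fun y hy => hUAm y (List.mem_cons_of_mem _ hy))
        have hdrop := pvFilterLen_drop (y := c) (vis := vis) UA hUA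
          (hUAm c (List.mem_cons_self ..)) hcv
        rw [← hadd] at hdrop
        simp only [List.length_cons] at h6
        omega

-- the reference DFS loop, characterized: it visits exactly one new component slice D'
theorem pvLoopR_spec (edges : List (Int × Int)) (n : Int) (vis0 UA : List Int)
    (hUAnd : UA.Nodup) (hUAe : ∀ y ∈ pvEnds edges, y ∈ UA)
    (hvc : ∀ x ∈ vis0, ∀ y, pvER edges x y → y ∈ vis0) :
    ∀ (fuel : Nat) (stack : List Int) (vis : PySem.Set Int) (D : List Int) (s d : Int),
    vis.Nodup → stack.Nodup → D.Nodup →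
    (∀ x, x ∈ vis ↔ (x ∈ vis0 ∨ x ∈ D ∨ x ∈ stack)) →
    (∀ x ∈ D, x ∉ vis0) → (∀ x ∈ stack, x ∉ vis0 ∧ x ∉ D) →
    (∀ x, x ∈ D ∨ x ∈ stack → pvConn edges n x) →
    (∀ x ∈ D, ∀ y, pvER edges x y → y ∈ vis) →
    (∀ x ∈ stack, x ∈ UA) →
    stack.length + (UA.filter (fun x => !(decide (x ∈ vis)))).length ≤ fuel →
    ∃ D' : List Int, D'.Nodup ∧ (∀ x ∈ D, x ∈ D') ∧ (∀ x ∈ stack, x ∈ D') ∧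
      (∀ x ∈ D', pvConn edges n x) ∧ (∀ x ∈ D', x ∉ vis0) ∧
      (∀ x ∈ D', ∀ y, pvER edges x y → (y ∈ vis0 ∨ y ∈ D')) ∧
      (pvLoopR (pvAdj edges) fuel stack vis s d).2.Nodup ∧
      (∀ x, x ∈ (pvLoopR (pvAdj edges) fuel stack vis s d).2 ↔ (x ∈ vis0 ∨ x ∈ D')) ∧
      (pvLoopR (pvAdj edges) fuel stack vis s d).1.1
        = s + ((D'.filter (pvPS edges)).length : Int) - ((D.filter (pvPS edges)).length : Int) ∧
      (pvLoopR (pvAdj edges) fuel stack vis s d).1.2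
        = d + ((D'.filter (fun v => !pvPS edges v)).length : Int)
            - ((D.filter (fun v => !pvPS edges v)).length : Int) := by
  intro fuel
  induction fuel with
  | zero =>
    intro stack vis D s d hv hstnd hDnd hmem hDv0 hstv0 hconn hDcl hstUA hfuel
    have hst : stack = [] := List.eq_nil_of_length_eq_zero (by omega)
    subst hst
    refine ⟨D, hDnd, fun x hx => hx, fun x hx => absurd hx (List.not_mem_nil),
      fun x hx => hconn x (Or.inl hx), hDv0, ?_, ?_, ?_, ?_, ?_⟩
    · intro x hx y hEy
      rcases (hmem y).mp (hDcl x hx y hEy) with h | h | h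
      · exact Or.inl h
      · exact Or.inr h
      · exact absurd h (List.not_mem_nil)
    · exact hv
    · intro x
      simp only [pvLoopR]
      rw [hmem x]
      simp
    · simp only [pvLoopR]
      omega
    · simp only [pvLoopR]
      omega
  | succ fuel ih =>
    intro stack vis D s d hv hstnd hDnd hmem hDv0 hstv0 hconn hDcl hstUA hfuel
    cases stack with
    | nil =>
      refine ⟨D, hDnd, fun x hx => hx, fun x hx => absurd hx (List.not_mem_nil),
        fun x hx => hconn x (Or.inl hx), hDv0, ?_, ?_, ?_, ?_, ?_⟩
      · intro x hx y hEy
        rcases (hmem y).mp (hDcl x hx y hEy) with h | h | h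
        · exact Or.inl h
        · exact Or.inr h
        · exact absurd h (List.not_mem_nil)
      · exact hv
      · intro x
        simp only [pvLoopR]
        rw [hmem x]
        simp
      · simp only [pvLoopR]
        omega
      · simp only [pvLoopR]
        omega
    | cons node rest =>
      have hnode0 := hstv0 node (List.mem_cons_self ..)
      have hndr : node ∉ rest := (List.nodup_cons.mp hstnd).1
      have hrestnd : rest.Nodup := (List.nodup_cons.mp hstnd).2
      have hrsub : ∀ x ∈ rest, x ∈ vis :=
        fun x hx => (hmem x).mpr (Or.inr (Or.inr (List.mem_cons_of_mem _ hx)))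
      have hnodevis : node ∈ vis := (hmem node).mpr (Or.inr (Or.inr (List.mem_cons_self ..)))
      have hconnnode : pvConn edges n node := hconn node (Or.inr (List.mem_cons_self ..))
      obtain ⟨p1, p2, p3, p4, p5, p6⟩ :=
        pvPush_spec (pvAdj edges) ((pvAdj edges).getD node []) vis rest hv hrestnd hrsub
      have hnbrsU : ∀ y ∈ (pvAdj edges).getD node [], y ∈ UA :=
        fun y hy => hUAe y (pvER_mem_ends (pvAdj_mem.mp hy)).2
      have hD1nd : (D ++ [node]).Nodup := by
        rw [List.nodup_append]
        refine ⟨hDnd, List.nodup_singleton _, ?_⟩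
        intro a ha b hb
        rw [List.mem_singleton] at hb
        exact fun he => hnode0.2 ((he.trans hb) ▸ ha)
      have hmem1 : ∀ x, x ∈ (((pvAdj edges).getD node []).foldl
          (fun (p : PySem.Set Int × List Int) c =>
            if PySem.Set.contains p.1 c then p else (PySem.Set.add p.1 c, c :: p.2)) (vis, rest)).1
          ↔ (x ∈ vis0 ∨ x ∈ D ++ [node] ∨ x ∈ (((pvAdj edges).getD node []).foldl
          (fun (p : PySem.Set Int × List Int) c =>
            if PySem.Set.contains p.1 c then p else (PySem.Set.add p.1 c, c :: p.2)) (vis, rest)).2) := by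
        intro x
        rw [p2 x]
        constructor
        · intro hx
          have hcore : x ∈ vis → (x ∈ vis0 ∨ x ∈ D ++ [node] ∨ x ∈ (((pvAdj edges).getD node []).foldl
              (fun (p : PySem.Set Int × List Int) c =>
                if PySem.Set.contains p.1 c then p else (PySem.Set.add p.1 c, c :: p.2)) (vis, rest)).2) := by
            intro hxv
            rcases (hmem x).mp hxv with h0 | hD | hns
            · exact Or.inl h0
            · exact Or.inr (Or.inl (List.mem_append_left _ hD))
            · rcases List.mem_cons.mp hns with rfl | hr
              · exact Or.inr (Or.inl (List.mem_append_right _ (List.mem_singleton_self _)))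
              · exact Or.inr (Or.inr ((p3 x).mpr (Or.inl hr)))
          rcases hx with hxv | hnb
          · exact hcore hxv
          · by_cases hxv : x ∈ vis
            · exact hcore hxv
            · exact Or.inr (Or.inr ((p3 x).mpr (Or.inr ⟨hnb, hxv⟩)))
        · intro hx
          rcases hx with h0 | hD1 | hst2
          · exact Or.inl ((hmem x).mpr (Or.inl h0))
          · rcases List.mem_append.mp hD1 with hD | hn
            · exact Or.inl ((hmem x).mpr (Or.inr (Or.inl hD)))
            · rw [List.mem_singleton.mp hn]
              exact Or.inl hnodevis
          · rcases (p3 x).mp hst2 with hr | ⟨hnb, _⟩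
            · exact Or.inl ((hmem x).mpr (Or.inr (Or.inr (List.mem_cons_of_mem _ hr))))
            · exact Or.inr hnb
      have hstv1 : ∀ x ∈ (((pvAdj edges).getD node []).foldl
          (fun (p : PySem.Set Int × List Int) c =>
            if PySem.Set.contains p.1 c then p else (PySem.Set.add p.1 c, c :: p.2)) (vis, rest)).2,
          x ∉ vis0 ∧ x ∉ D ++ [node] := by
        intro x hx
        rcases (p3 x).mp hx with hr | ⟨hnb, hxv⟩
        · have h1 := hstv0 x (List.mem_cons_of_mem _ hr)
          refine ⟨h1.1, ?_⟩
          simp only [List.mem_append, List.mem_singleton]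
          rintro (hD | rfl)
          · exact h1.2 hD
          · exact hndr hr
        · refine ⟨fun h0 => hxv ((hmem x).mpr (Or.inl h0)), ?_⟩
          simp only [List.mem_append, List.mem_singleton]
          rintro (hD | rfl)
          · exact hxv ((hmem x).mpr (Or.inr (Or.inl hD)))
          · exact hxv hnodevis
      have hconn1 : ∀ x, x ∈ D ++ [node] ∨ x ∈ (((pvAdj edges).getD node []).foldl
          (fun (p : PySem.Set Int × List Int) c =>
            if PySem.Set.contains p.1 c then p else (PySem.Set.add p.1 c, c :: p.2)) (vis, rest)).2
          → pvConn edges n x := by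
        intro x hx
        rcases hx with hx | hx
        · rcases List.mem_append.mp hx with hD | hn
          · exact hconn x (Or.inl hD)
          · rw [List.mem_singleton.mp hn]
            exact hconnnode
        · rcases (p3 x).mp hx with hr | ⟨hnb, _⟩
          · exact hconn x (Or.inr (List.mem_cons_of_mem _ hr))
          · exact Relation.ReflTransGen.tail hconnnode (pvAdj_mem.mp hnb)
      have hDcl1 : ∀ x ∈ D ++ [node], ∀ y, pvER edges x y → y ∈ (((pvAdj edges).getD node []).foldl
          (fun (p : PySem.Set Int × List Int) c =>
            if PySem.Set.contains p.1 c then p else (PySem.Set.add p.1 c, c :: p.2)) (vis, rest)).1 := by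
        intro x hx y hEy
        rcases List.mem_append.mp hx with hD | hn
        · exact (p2 y).mpr (Or.inl (hDcl x hD y hEy))
        · rw [List.mem_singleton.mp hn] at hEy
          exact (p2 y).mpr (Or.inr (pvAdj_mem.mpr hEy))
      have hstUA1 : ∀ x ∈ (((pvAdj edges).getD node []).foldl
          (fun (p : PySem.Set Int × List Int) c =>
            if PySem.Set.contains p.1 c then p else (PySem.Set.add p.1 c, c :: p.2)) (vis, rest)).2,
          x ∈ UA := by
        intro x hx
        rcases (p3 x).mp hx with hr | ⟨hnb, _⟩
        · exact hstUA x (List.mem_cons_of_mem _ hr)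
        · exact hnbrsU x hnb
      have hfuel1 : (((pvAdj edges).getD node []).foldl
          (fun (p : PySem.Set Int × List Int) c =>
            if PySem.Set.contains p.1 c then p else (PySem.Set.add p.1 c, c :: p.2)) (vis, rest)).2.length
          + (UA.filter (fun x => !(decide (x ∈ (((pvAdj edges).getD node []).foldl
          (fun (p : PySem.Set Int × List Int) c =>
            if PySem.Set.contains p.1 c then p else (PySem.Set.add p.1 c, c :: p.2)) (vis, rest)).1)))).length
          ≤ fuel := by
        have h6 := p6 UA hUAnd hnbrsU
        simp only [List.length_cons] at hfuel
        omega
      simp only [pvLoopR]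
      have hcond : (PySem.Int.mod node 2
          == PySem.Int.mod ((((pvAdj edges).getD node []).length : Nat) : Int) 2)
          = pvPS edges node := by
        unfold pvPS
        rw [pvAdj_len]
      rw [hcond]
      by_cases hps : pvPS edges node = true
      · rw [if_pos hps]
        obtain ⟨D', q1, q2, q3, q4, q5, q6, q7, q8, q9, q10⟩ :=
          ih _ _ (D ++ [node]) (s + 1) d p1 p4 hD1nd hmem1 (fun x hx => (by
            rcases List.mem_append.mp hx with hD | hn
            · exact hDv0 x hD
            · rw [List.mem_singleton.mp hn]; exact hnode0.1))
            hstv1 hconn1 hDcl1 hstUA1 hfuel1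
        have hl1 : ((D ++ [node]).filter (pvPS edges)).length
            = (D.filter (pvPS edges)).length + 1 := by
          rw [List.filter_append]
          simp [hps]
        have hl2 : ((D ++ [node]).filter (fun v => !pvPS edges v)).length
            = (D.filter (fun v => !pvPS edges v)).length := by
          rw [List.filter_append]
          simp [hps]
        refine ⟨D', q1, fun x hx => q2 x (List.mem_append_left _ hx), ?_, q4, q5, q6, q7, q8, ?_, ?_⟩
        · intro x hx
          rcases List.mem_cons.mp hx with rfl | hr
          · exact q2 x (List.mem_append_right _ (List.mem_singleton_self _))
          · exact q3 x ((p3 x).mpr (Or.inl hr))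
        · rw [q9, hl1]
          push_cast
          ring
        · rw [q10, hl2]
      · rw [if_neg hps]
        rw [Bool.not_eq_true] at hps
        obtain ⟨D', q1, q2, q3, q4, q5, q6, q7, q8, q9, q10⟩ :=
          ih _ _ (D ++ [node]) s (d + 1) p1 p4 hD1nd hmem1 (fun x hx => (by
            rcases List.mem_append.mp hx with hD | hn
            · exact hDv0 x hD
            · rw [List.mem_singleton.mp hn]; exact hnode0.1))
            hstv1 hconn1 hDcl1 hstUA1 hfuel1
        have hl1 : ((D ++ [node]).filter (pvPS edges)).length
            = (D.filter (pvPS edges)).length := by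
          rw [List.filter_append]
          simp [hps]
        have hl2 : ((D ++ [node]).filter (fun v => !pvPS edges v)).length
            = (D.filter (fun v => !pvPS edges v)).length + 1 := by
          rw [List.filter_append]
          simp [hps]
        refine ⟨D', q1, fun x hx => q2 x (List.mem_append_left _ hx), ?_, q4, q5, q6, q7, q8, ?_, ?_⟩
        · intro x hx
          rcases List.mem_cons.mp hx with rfl | hr
          · exact q2 x (List.mem_append_right _ (List.mem_singleton_self _))
          · exact q3 x ((p3 x).mpr (Or.inl hr))
        · rw [q9, hl1]
        · rw [q10, hl2]
          push_cast
          ring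

---------------------------------------------------------------------------
-- Part 6: B's counting passes, evaluated.
---------------------------------------------------------------------------

-- the grouping fold over comp.items
theorem pvCount_fold (deg : PySem.Dict Int Int) (its : List (Int × Int)) :
    ∀ (s0 d0 : PySem.Dict Int Int) (l : Int),
    (its.foldl (fun (p : PySem.Dict Int Int × PySem.Dict Int Int) vl =>
        if PySem.Int.mod vl.1 2 == PySem.Int.mod (deg.getD vl.1 0) 2
        then (p.1.insert vl.2 (p.1.getD vl.2 0 + 1), p.2)
        else (p.1, p.2.insert vl.2 (p.2.getD vl.2 0 + 1))) (s0, d0)).1.getD l 0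
      = s0.getD l 0 + (its.countP (fun vl => decide (vl.2 = l)
          && (PySem.Int.mod vl.1 2 == PySem.Int.mod (deg.getD vl.1 0) 2)) : Int) ∧
    (its.foldl (fun (p : PySem.Dict Int Int × PySem.Dict Int Int) vl =>
        if PySem.Int.mod vl.1 2 == PySem.Int.mod (deg.getD vl.1 0) 2
        then (p.1.insert vl.2 (p.1.getD vl.2 0 + 1), p.2)
        else (p.1, p.2.insert vl.2 (p.2.getD vl.2 0 + 1))) (s0, d0)).2.getD l 0
      = d0.getD l 0 + (its.countP (fun vl => decide (vl.2 = l)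
          && !(PySem.Int.mod vl.1 2 == PySem.Int.mod (deg.getD vl.1 0) 2)) : Int) := by
  induction its with
  | nil => intro s0 d0 l; simp
  | cons vl t ih =>
    intro s0 d0 l
    rw [List.foldl_cons, List.countP_cons, List.countP_cons]
    by_cases hp : (PySem.Int.mod vl.1 2 == PySem.Int.mod (deg.getD vl.1 0) 2) = true
    · rw [if_pos hp]
      obtain ⟨ih1, ih2⟩ := ih (s0.insert vl.2 (s0.getD vl.2 0 + 1)) d0 l
      have hc1 : (decide (vl.2 = l) && (PySem.Int.mod vl.1 2
          == PySem.Int.mod (deg.getD vl.1 0) 2)) = decide (vl.2 = l) := by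
        rw [hp, Bool.and_true]
      have hc2 : (decide (vl.2 = l) && !(PySem.Int.mod vl.1 2
          == PySem.Int.mod (deg.getD vl.1 0) 2)) = false := by
        rw [hp]
        simp
      rw [hc1, hc2]
      refine ⟨?_, ?_⟩
      · rw [ih1, PySem.Dict.getD_insert]
        by_cases hl : vl.2 = l
        · rw [if_pos hl.symm, decide_eq_true hl]
          have : s0.getD l 0 = s0.getD vl.2 0 := by rw [hl]
          rw [this]
          simp only [if_true]
          omega
        · rw [if_neg (fun he => hl he.symm), decide_eq_false hl]
          simp only [Bool.false_eq_true, if_false]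
          omega
      · rw [ih2]
        simp only [Bool.false_eq_true, if_false]
        omega
    · rw [if_neg hp]
      have hp' : (PySem.Int.mod vl.1 2 == PySem.Int.mod (deg.getD vl.1 0) 2) = false :=
        Bool.eq_false_iff.mpr hp
      obtain ⟨ih1, ih2⟩ := ih s0 (d0.insert vl.2 (d0.getD vl.2 0 + 1)) l
      have hc1 : (decide (vl.2 = l) && (PySem.Int.mod vl.1 2
          == PySem.Int.mod (deg.getD vl.1 0) 2)) = false := by
        rw [hp']
        simp
      have hc2 : (decide (vl.2 = l) && !(PySem.Int.mod vl.1 2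
          == PySem.Int.mod (deg.getD vl.1 0) 2)) = decide (vl.2 = l) := by
        rw [hp']
        simp
      rw [hc1, hc2]
      refine ⟨?_, ?_⟩
      · rw [ih1]
        simp only [Bool.false_eq_true, if_false]
        omega
      · rw [ih2, PySem.Dict.getD_insert]
        by_cases hl : vl.2 = l
        · rw [if_pos hl.symm, decide_eq_true hl]
          have : d0.getD l 0 = d0.getD vl.2 0 := by rw [hl]
          rw [this]
          simp only [if_true]
          omega
        · rw [if_neg (fun he => hl he.symm), decide_eq_false hl]
          simp only [Bool.false_eq_true, if_false]
          omega

---------------------------------------------------------------------------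
-- Part 7: the outer loop of the reference equals B's grouped counts; verdict.
---------------------------------------------------------------------------

-- under Pre_, any Nodup list of mentioned ids has at most 1_000_001 elements
theorem pvDistinct_bound {nodes : List Int} {edges : List (Int × Int)}
    (hpre : Pre_solution nodes edges) (L : List Int) (hnd : L.Nodup)
    (hsub : ∀ x ∈ L, x ∈ pvU nodes edges) : L.length ≤ 1000001 := by
  have hinj : (L.map pvIdx).Nodup := by
    refine List.Nodup.map_on ?_ hnd
    intro x hx y hy hxy
    exact pvIdx_inj ⟨hpre.1, hpre.2⟩ (hsub x hx) (hsub y hy) hxy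
  have hsubs : (L.map pvIdx).toFinset ⊆ Finset.range 1000001 := by
    intro n hn
    rw [List.mem_toFinset] at hn
    obtain ⟨x, _, rfl⟩ := List.mem_map.mp hn
    exact Finset.mem_range.mpr (pvIdx_lt x)
  have h1 : (L.map pvIdx).toFinset.card = (L.map pvIdx).length :=
    List.toFinset_card_of_nodup hinj
  have h2 := Finset.card_le_card hsubs
  rw [Finset.card_range, h1, List.length_map] at h2
  exact h2

theorem pvConn_ends {edges : List (Int × Int)} {m x : Int} (h : pvConn edges m x) :
    x = m ∨ x ∈ pvEnds edges := by
  induction h with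
  | refl => exact Or.inl rfl
  | tail h1 h2 _ => exact Or.inr (pvER_mem_ends h2).2

-- the per-label class counters of the final partition, and their 0/1 indicators
def pvCnt1 (nodes : List Int) (edges : List (Int × Int)) (l : Int) : Int :=
  ((pvComp nodes edges).keys.countP (fun k =>
      decide (pvKap (pvComp nodes edges) k = l) && pvPS edges k) : Int)

def pvCnt2 (nodes : List Int) (edges : List (Int × Int)) (l : Int) : Int :=
  ((pvComp nodes edges).keys.countP (fun k =>
      decide (pvKap (pvComp nodes edges) k = l) && !(pvPS edges k)) : Int)

def pvF1 (nodes : List Int) (edges : List (Int × Int)) (l : Int) : Int :=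
  if pvCnt1 nodes edges l == 1 then 1 else 0

def pvF2 (nodes : List Int) (edges : List (Int × Int)) (l : Int) : Int :=
  if pvCnt2 nodes edges l == 1 then 1 else 0

-- one DFS run from an unvisited start m: it returns exactly the class counters of m's label
theorem pvDFS_run (nodes : List Int) (edges : List (Int × Int))
    (hpre : Pre_solution nodes edges) (m : Int) (hm : m ∈ nodes)
    (vis : PySem.Set Int) (S : List Int) (hv : vis.Nodup)
    (hinv : ∀ x, x ∈ vis ↔ ((pvComp nodes edges).contains x = true
        ∧ pvKap (pvComp nodes edges) x ∈ S))
    (hmv : m ∉ vis) :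
    (pvLoopR (pvAdj edges) pvFuel [m] (PySem.Set.add vis m) 0 0).1.1
      = pvCnt1 nodes edges (pvKap (pvComp nodes edges) m) ∧
    (pvLoopR (pvAdj edges) pvFuel [m] (PySem.Set.add vis m) 0 0).1.2
      = pvCnt2 nodes edges (pvKap (pvComp nodes edges) m) ∧
    (pvLoopR (pvAdj edges) pvFuel [m] (PySem.Set.add vis m) 0 0).2.Nodup ∧
    (∀ x, x ∈ (pvLoopR (pvAdj edges) pvFuel [m] (PySem.Set.add vis m) 0 0).2
      ↔ ((pvComp nodes edges).contains x = true
        ∧ (pvKap (pvComp nodes edges) x ∈ S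
            ∨ pvKap (pvComp nodes edges) x = pvKap (pvComp nodes edges) m))) := by
  obtain ⟨hKnd, hKc, hKcn, hKe⟩ := pvComp_spec nodes edges
  have hcm : (pvComp nodes edges).contains m = true := (hKc m).mpr (Or.inr hm)
  have hvc : ∀ x ∈ vis, ∀ y, pvER edges x y → y ∈ vis := by
    intro x hx y hEy
    obtain ⟨hcx, hsx⟩ := (hinv x).mp hx
    have hcy : (pvComp nodes edges).contains y = true :=
      (hKc y).mpr (Or.inl (pvER_mem_ends hEy).2)
    have hk : pvKap (pvComp nodes edges) y = pvKap (pvComp nodes edges) x := by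
      rcases hEy with he | he
      · exact (hKe (x, y) he).symm
      · exact hKe (y, x) he
    exact (hinv y).mpr ⟨hcy, hk ▸ hsx⟩
  have hUAnd : (PySem.Set.ofList (m :: pvEnds edges)).Nodup := PySem.Set.nodup_ofList _
  have hUAe : ∀ y ∈ pvEnds edges, y ∈ PySem.Set.ofList (m :: pvEnds edges) :=
    fun y hy => (PySem.Set.mem_ofList _ y).mpr (List.mem_cons_of_mem _ hy)
  have hUAsub : ∀ x ∈ PySem.Set.ofList (m :: pvEnds edges), x ∈ pvU nodes edges := by
    intro x hx
    rcases List.mem_cons.mp ((PySem.Set.mem_ofList _ x).mp hx) with rfl | hx2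
    · exact List.mem_append_left _ hm
    · exact List.mem_append_right _ hx2
  have hUAlen : (PySem.Set.ofList (m :: pvEnds edges)).length ≤ 1000001 :=
    pvDistinct_bound hpre _ hUAnd hUAsub
  have hfuel : ([m] : List Int).length
      + ((PySem.Set.ofList (m :: pvEnds edges)).filter
          (fun x => !(decide (x ∈ PySem.Set.add vis m)))).length ≤ pvFuel := by
    have hle := List.length_filter_le (fun x => !(decide (x ∈ PySem.Set.add vis m)))
      (PySem.Set.ofList (m :: pvEnds edges))
    simp only [List.length_singleton]
    unfold pvFuel
    omega
  obtain ⟨D', q1, q2, q3, q4, q5, q6, q7, q8, q9, q10⟩ :=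
    pvLoopR_spec edges m vis (PySem.Set.ofList (m :: pvEnds edges)) hUAnd hUAe hvc
      pvFuel [m] (PySem.Set.add vis m) [] 0 0
      (PySem.Set.nodup_add vis m hv) (List.nodup_singleton m) List.nodup_nil
      (fun x => by rw [PySem.Set.mem_add]; simp)
      (fun x hx => absurd hx (List.not_mem_nil))
      (fun x hx => by rw [List.mem_singleton.mp hx]; exact ⟨hmv, List.not_mem_nil⟩)
      (fun x hx => hx.elim (fun h0 => absurd h0 (List.not_mem_nil))
        (fun h0 => by rw [List.mem_singleton.mp h0]; exact Relation.ReflTransGen.refl))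
      (fun x hx => absurd hx (List.not_mem_nil))
      (fun x hx => by
        rw [List.mem_singleton.mp hx]
        exact (PySem.Set.mem_ofList _ m).mpr (List.mem_cons_self ..))
      hfuel
  have hmD : m ∈ D' := q3 m (List.mem_cons_self ..)
  have hgrow : ∀ x, pvConn edges m x → x ∈ D' := by
    intro x hx
    induction hx with
    | refl => exact hmD
    | tail h1 h2 ihx =>
      rcases q6 _ ihx _ h2 with h0 | hd
      · exact absurd (hvc _ h0 _ (pvER_symm h2)) (q5 _ ihx)
      · exact hd
  have hD'char : ∀ x, x ∈ D' ↔ ((pvComp nodes edges).contains x = true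
      ∧ pvKap (pvComp nodes edges) x = pvKap (pvComp nodes edges) m) := by
    intro x
    constructor
    · intro hx
      have hconn := q4 x hx
      have hcx : (pvComp nodes edges).contains x = true := by
        rcases pvConn_ends hconn with rfl | he
        · exact hcm
        · exact (hKc x).mpr (Or.inl he)
      exact ⟨hcx, (pvKap_eq_iff_conn nodes edges hcx hcm).mpr (pvConn_symm hconn)⟩
    · rintro ⟨hcx, hk⟩
      exact hgrow x ((pvKap_eq_iff_conn nodes edges hcm hcx).mp hk.symm)
  have hperm : D'.Perm ((pvComp nodes edges).keys.filter
      (fun k => decide (pvKap (pvComp nodes edges) k = pvKap (pvComp nodes edges) m))) := by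
    refine (List.perm_ext_iff_of_nodup q1 (List.Nodup.filter _ hKnd)).mpr ?_
    intro a
    rw [List.mem_filter, hD'char a]
    constructor
    · rintro ⟨hc, hk⟩
      exact ⟨(PySem.Dict.contains_iff_mem_keys _ a).mp hc, decide_eq_true hk⟩
    · rintro ⟨hma, hd⟩
      exact ⟨(PySem.Dict.contains_iff_mem_keys _ a).mpr hma, of_decide_eq_true hd⟩
  have hcnt1 : ((D'.filter (pvPS edges)).length : Int)
      = pvCnt1 nodes edges (pvKap (pvComp nodes edges) m) := by
    unfold pvCnt1
    rw [(hperm.filter (pvPS edges)).length_eq, List.filter_filter,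
      ← List.countP_eq_length_filter]
    norm_cast
    exact List.countP_congr (fun x _ => by rw [Bool.and_comm])
  have hcnt2 : ((D'.filter (fun v => !pvPS edges v)).length : Int)
      = pvCnt2 nodes edges (pvKap (pvComp nodes edges) m) := by
    unfold pvCnt2
    rw [(hperm.filter (fun v => !pvPS edges v)).length_eq, List.filter_filter,
      ← List.countP_eq_length_filter]
    norm_cast
    exact List.countP_congr (fun x _ => by rw [Bool.and_comm])
  refine ⟨?_, ?_, q7, ?_⟩
  · rw [q9, ← hcnt1]
    simp
  · rw [q10, ← hcnt2]
    simp
  · intro x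
    rw [q8 x, hinv x, hD'char x]
    tauto

-- the outer fold over starts, grouped by final label
theorem pvOuterR_spec (nodes : List Int) (edges : List (Int × Int))
    (hpre : Pre_solution nodes edges) :
    ∀ (ns : List Int), (∀ x ∈ ns, x ∈ nodes) →
    ∀ (vis S : PySem.Set Int) (c1 c2 : Int), vis.Nodup → S.Nodup →
    (∀ x, x ∈ vis ↔ ((pvComp nodes edges).contains x = true
        ∧ pvKap (pvComp nodes edges) x ∈ S)) →
    (ns.foldl (fun (st : Int × Int × PySem.Set Int) start =>
        if PySem.Set.contains st.2.2 start then st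
        else
          let pr := pvLoopR (pvAdj edges) pvFuel [start] (PySem.Set.add st.2.2 start) 0 0
          (st.1 + (if pr.1.1 == 1 then (1 : Int) else 0),
           st.2.1 + (if pr.1.2 == 1 then (1 : Int) else 0), pr.2)) (c1, c2, vis)).1
      = c1 + (((PySem.Set.update S (ns.map (pvKap (pvComp nodes edges)))).map
            (pvF1 nodes edges)).sum - (S.map (pvF1 nodes edges)).sum) ∧
    (ns.foldl (fun (st : Int × Int × PySem.Set Int) start =>
        if PySem.Set.contains st.2.2 start then st
        else
          let pr := pvLoopR (pvAdj edges) pvFuel [start] (PySem.Set.add st.2.2 start) 0 0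
          (st.1 + (if pr.1.1 == 1 then (1 : Int) else 0),
           st.2.1 + (if pr.1.2 == 1 then (1 : Int) else 0), pr.2)) (c1, c2, vis)).2.1
      = c2 + (((PySem.Set.update S (ns.map (pvKap (pvComp nodes edges)))).map
            (pvF2 nodes edges)).sum - (S.map (pvF2 nodes edges)).sum) := by
  intro ns
  induction ns with
  | nil =>
    intro _ vis S c1 c2 _ _ _
    constructor <;> simp [PySem.Set.update_nil]
  | cons m t ih =>
    intro hns vis S c1 c2 hv hS hinv
    obtain ⟨hKnd, hKc, hKcn, hKe⟩ := pvComp_spec nodes edges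
    have hm : m ∈ nodes := hns m (List.mem_cons_self ..)
    have hcm : (pvComp nodes edges).contains m = true := (hKc m).mpr (Or.inr hm)
    rw [List.foldl_cons]
    by_cases hvm : PySem.Set.contains vis m = true
    · rw [if_pos hvm]
      have hkS : pvKap (pvComp nodes edges) m ∈ S :=
        ((hinv m).mp ((PySem.Set.contains_iff vis m).mp hvm)).2
      have hupd : PySem.Set.update S ((m :: t).map (pvKap (pvComp nodes edges)))
          = PySem.Set.update S (t.map (pvKap (pvComp nodes edges))) := by
        rw [List.map_cons, PySem.Set.update_cons, PySem.Set.add_of_mem hkS]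
      rw [hupd]
      exact ih (fun x hx => hns x (List.mem_cons_of_mem _ hx)) vis S c1 c2 hv hS hinv
    · rw [if_neg hvm]
      have hmv : m ∉ vis := fun h => hvm ((PySem.Set.contains_iff vis m).mpr h)
      obtain ⟨e1, e2, e3, e4⟩ := pvDFS_run nodes edges hpre m hm vis S hv hinv hmv
      have hkS : pvKap (pvComp nodes edges) m ∉ S := fun h => hmv ((hinv m).mpr ⟨hcm, h⟩)
      have hS' : (PySem.Set.add S (pvKap (pvComp nodes edges) m)).Nodup :=
        PySem.Set.nodup_add _ _ hS
      have hinv' : ∀ x, x ∈ (pvLoopR (pvAdj edges) pvFuel [m] (PySem.Set.add vis m) 0 0).2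
          ↔ ((pvComp nodes edges).contains x = true
            ∧ pvKap (pvComp nodes edges) x ∈ PySem.Set.add S (pvKap (pvComp nodes edges) m)) := by
        intro x
        rw [e4 x]
        constructor
        · rintro ⟨hc, hk | hk⟩
          · exact ⟨hc, (PySem.Set.mem_add _ _ _).mpr (Or.inl hk)⟩
          · exact ⟨hc, (PySem.Set.mem_add _ _ _).mpr (Or.inr hk)⟩
        · rintro ⟨hc, hk⟩
          rcases (PySem.Set.mem_add _ _ _).mp hk with hk | hk
          · exact ⟨hc, Or.inl hk⟩
          · exact ⟨hc, Or.inr hk⟩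
      obtain ⟨ih1, ih2⟩ := ih (fun x hx => hns x (List.mem_cons_of_mem _ hx))
        (pvLoopR (pvAdj edges) pvFuel [m] (PySem.Set.add vis m) 0 0).2
        (PySem.Set.add S (pvKap (pvComp nodes edges) m))
        (c1 + (if (pvLoopR (pvAdj edges) pvFuel [m] (PySem.Set.add vis m) 0 0).1.1 == 1
            then (1 : Int) else 0))
        (c2 + (if (pvLoopR (pvAdj edges) pvFuel [m] (PySem.Set.add vis m) 0 0).1.2 == 1
            then (1 : Int) else 0))
        e3 hS' hinv'
      have hupd : PySem.Set.update S ((m :: t).map (pvKap (pvComp nodes edges)))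
          = PySem.Set.update (PySem.Set.add S (pvKap (pvComp nodes edges) m))
              (t.map (pvKap (pvComp nodes edges))) := by
        rw [List.map_cons, PySem.Set.update_cons]
      have hsum1 : ((PySem.Set.add S (pvKap (pvComp nodes edges) m)).map
          (pvF1 nodes edges)).sum
          = (S.map (pvF1 nodes edges)).sum
            + pvF1 nodes edges (pvKap (pvComp nodes edges) m) := by
        rw [PySem.Set.add_of_not_mem hkS, List.map_append, List.sum_append]
        simp
      have hsum2 : ((PySem.Set.add S (pvKap (pvComp nodes edges) m)).map
          (pvF2 nodes edges)).sum
          = (S.map (pvF2 nodes edges)).sum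
            + pvF2 nodes edges (pvKap (pvComp nodes edges) m) := by
        rw [PySem.Set.add_of_not_mem hkS, List.map_append, List.sum_append]
        simp
      have hif1 : (if (pvLoopR (pvAdj edges) pvFuel [m] (PySem.Set.add vis m) 0 0).1.1 == 1
          then (1 : Int) else 0) = pvF1 nodes edges (pvKap (pvComp nodes edges) m) := by
        rw [e1]
        rfl
      have hif2 : (if (pvLoopR (pvAdj edges) pvFuel [m] (PySem.Set.add vis m) 0 0).1.2 == 1
          then (1 : Int) else 0) = pvF2 nodes edges (pvKap (pvComp nodes edges) m) := by
        rw [e2]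
        rfl
      rw [hupd]
      constructor
      · rw [ih1, hsum1, hif1]
        ring
      · rw [ih2, hsum2, hif2]
        ring

-- evaluating the reference: grouped sums over the distinct labels of the starts
theorem pvARef_eval (nodes : List Int) (edges : List (Int × Int))
    (hpre : Pre_solution nodes edges) :
    pvARef nodes edges =
      [((PySem.Set.ofList (nodes.map (pvKap (pvComp nodes edges)))).map
          (pvF1 nodes edges)).sum,
       ((PySem.Set.ofList (nodes.map (pvKap (pvComp nodes edges)))).map
          (pvF2 nodes edges)).sum] := by
  obtain ⟨h1, h2⟩ := pvOuterR_spec nodes edges hpre nodes (fun x hx => hx)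
    PySem.Set.empty PySem.Set.empty 0 0 List.nodup_nil List.nodup_nil
    (fun x => by
      constructor
      · intro hx
        exact absurd hx (List.not_mem_nil)
      · rintro ⟨_, hx⟩
        exact absurd hx (List.not_mem_nil))
  unfold pvARef
  simp only []
  rw [h1, h2, PySem.Set.update_empty]
  simp [PySem.Set.empty]

-- the degree dict in reduced form (same term up to zeta)
theorem pvDeg_getD' (edges : List (Int × Int)) (v : Int) :
    (((edges.foldl (fun st e =>
      ((pvMergeB (pvSeen (pvSeen st e.1) e.2).1 (pvSeen (pvSeen st e.1) e.2).2.1 e.1 e.2).1,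
       (pvMergeB (pvSeen (pvSeen st e.1) e.2).1 (pvSeen (pvSeen st e.1) e.2).2.1 e.1 e.2).2,
       (pvSeen (pvSeen st e.1) e.2).2.2))
      (PySem.Dict.empty, PySem.Dict.empty, PySem.Dict.empty))).2.2).getD v 0 = ((pvEnds edges).count v : Int) :=
  pvDeg_getD edges v

-- evaluating B: its grouping dicts hold exactly the class counters
theorem pvAlt_eval (nodes : List Int) (edges : List (Int × Int)) :
    solution_alt nodes edges =
      [((PySem.Set.ofList (nodes.map (pvKap (pvComp nodes edges)))).map
          (pvF1 nodes edges)).sum,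
       ((PySem.Set.ofList (nodes.map (pvKap (pvComp nodes edges)))).map
          (pvF2 nodes edges)).sum] := by
  obtain ⟨hKnd, hKc, hKcn, hKe⟩ := pvComp_spec nodes edges
  have hsa : solution_alt nodes edges =
      [(PySem.Set.ofList (nodes.map (fun n => (pvComp nodes edges).getD n n))).foldl
          (fun acc l => acc + (if (((pvComp nodes edges).items.foldl
      (fun (p : PySem.Dict Int Int × PySem.Dict Int Int) vl =>
        if PySem.Int.mod vl.1 2 == PySem.Int.mod (((edges.foldl (fun st e =>
      ((pvMergeB (pvSeen (pvSeen st e.1) e.2).1 (pvSeen (pvSeen st e.1) e.2).2.1 e.1 e.2).1,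
       (pvMergeB (pvSeen (pvSeen st e.1) e.2).1 (pvSeen (pvSeen st e.1) e.2).2.1 e.1 e.2).2,
       (pvSeen (pvSeen st e.1) e.2).2.2))
      (PySem.Dict.empty, PySem.Dict.empty, PySem.Dict.empty))).2.2.getD vl.1 0) 2
        then (p.1.insert vl.2 (p.1.getD vl.2 0 + 1), p.2)
        else (p.1, p.2.insert vl.2 (p.2.getD vl.2 0 + 1)))
      (PySem.Dict.empty, PySem.Dict.empty))).1.getD l 0 == 1 then (1 : Int) else 0)) 0,
       (PySem.Set.ofList (nodes.map (fun n => (pvComp nodes edges).getD n n))).foldl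
          (fun acc l => acc + (if (((pvComp nodes edges).items.foldl
      (fun (p : PySem.Dict Int Int × PySem.Dict Int Int) vl =>
        if PySem.Int.mod vl.1 2 == PySem.Int.mod (((edges.foldl (fun st e =>
      ((pvMergeB (pvSeen (pvSeen st e.1) e.2).1 (pvSeen (pvSeen st e.1) e.2).2.1 e.1 e.2).1,
       (pvMergeB (pvSeen (pvSeen st e.1) e.2).1 (pvSeen (pvSeen st e.1) e.2).2.1 e.1 e.2).2,
       (pvSeen (pvSeen st e.1) e.2).2.2))
      (PySem.Dict.empty, PySem.Dict.empty, PySem.Dict.empty))).2.2.getD vl.1 0) 2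
        then (p.1.insert vl.2 (p.1.getD vl.2 0 + 1), p.2)
        else (p.1, p.2.insert vl.2 (p.2.getD vl.2 0 + 1)))
      (PySem.Dict.empty, PySem.Dict.empty))).2.getD l 0 == 1 then (1 : Int) else 0)) 0] := rfl
  rw [hsa]
  rw [PySem.List.foldl_add, PySem.List.foldl_add, zero_add, zero_add]
  have hmap : (fun n => (pvComp nodes edges).getD n n) = pvKap (pvComp nodes edges) := rfl
  rw [hmap]
  have hcong1 : ∀ k, (pvComp nodes edges).contains k = true →
      (pvComp nodes edges).getD k 0 = pvKap (pvComp nodes edges) k :=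
    fun k hk => pvGetD_contains_irrel _ k 0 k hk
  have hcong2 : ∀ k : Int,
      (PySem.Int.mod k 2 == PySem.Int.mod (((edges.foldl (fun st e =>
      ((pvMergeB (pvSeen (pvSeen st e.1) e.2).1 (pvSeen (pvSeen st e.1) e.2).2.1 e.1 e.2).1,
       (pvMergeB (pvSeen (pvSeen st e.1) e.2).1 (pvSeen (pvSeen st e.1) e.2).2.1 e.1 e.2).2,
       (pvSeen (pvSeen st e.1) e.2).2.2))
      (PySem.Dict.empty, PySem.Dict.empty, PySem.Dict.empty))).2.2.getD k 0) 2) = pvPS edges k := by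
    intro k
    rw [pvDeg_getD']
    rfl
  have hitems := PySem.Dict.items_eq_map_keys (pvComp nodes edges) hKnd (0 : Int)
  have hg1 : ∀ l : Int, (((pvComp nodes edges).items.foldl
      (fun (p : PySem.Dict Int Int × PySem.Dict Int Int) vl =>
        if PySem.Int.mod vl.1 2 == PySem.Int.mod (((edges.foldl (fun st e =>
      ((pvMergeB (pvSeen (pvSeen st e.1) e.2).1 (pvSeen (pvSeen st e.1) e.2).2.1 e.1 e.2).1,
       (pvMergeB (pvSeen (pvSeen st e.1) e.2).1 (pvSeen (pvSeen st e.1) e.2).2.1 e.1 e.2).2,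
       (pvSeen (pvSeen st e.1) e.2).2.2))
      (PySem.Dict.empty, PySem.Dict.empty, PySem.Dict.empty))).2.2.getD vl.1 0) 2
        then (p.1.insert vl.2 (p.1.getD vl.2 0 + 1), p.2)
        else (p.1, p.2.insert vl.2 (p.2.getD vl.2 0 + 1)))
      (PySem.Dict.empty, PySem.Dict.empty))).1.getD l 0 = pvCnt1 nodes edges l := by
    intro l
    obtain ⟨hc, _⟩ := pvCount_fold (((edges.foldl (fun st e =>
      ((pvMergeB (pvSeen (pvSeen st e.1) e.2).1 (pvSeen (pvSeen st e.1) e.2).2.1 e.1 e.2).1,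
       (pvMergeB (pvSeen (pvSeen st e.1) e.2).1 (pvSeen (pvSeen st e.1) e.2).2.1 e.1 e.2).2,
       (pvSeen (pvSeen st e.1) e.2).2.2))
      (PySem.Dict.empty, PySem.Dict.empty, PySem.Dict.empty))).2.2)
      (pvComp nodes edges).items PySem.Dict.empty PySem.Dict.empty l
    rw [hc, hitems, List.countP_map]
    unfold pvCnt1
    rw [PySem.Dict.getD_empty, zero_add]
    norm_cast
    refine List.countP_congr (fun k hk => ?_)
    have hck : (pvComp nodes edges).contains k = true :=
      (PySem.Dict.contains_iff_mem_keys _ k).mpr hk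
    rw [Function.comp_apply]
    rw [hcong1 k hck, hcong2 k]
  have hg2 : ∀ l : Int, (((pvComp nodes edges).items.foldl
      (fun (p : PySem.Dict Int Int × PySem.Dict Int Int) vl =>
        if PySem.Int.mod vl.1 2 == PySem.Int.mod (((edges.foldl (fun st e =>
      ((pvMergeB (pvSeen (pvSeen st e.1) e.2).1 (pvSeen (pvSeen st e.1) e.2).2.1 e.1 e.2).1,
       (pvMergeB (pvSeen (pvSeen st e.1) e.2).1 (pvSeen (pvSeen st e.1) e.2).2.1 e.1 e.2).2,
       (pvSeen (pvSeen st e.1) e.2).2.2))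
      (PySem.Dict.empty, PySem.Dict.empty, PySem.Dict.empty))).2.2.getD vl.1 0) 2
        then (p.1.insert vl.2 (p.1.getD vl.2 0 + 1), p.2)
        else (p.1, p.2.insert vl.2 (p.2.getD vl.2 0 + 1)))
      (PySem.Dict.empty, PySem.Dict.empty))).2.getD l 0 = pvCnt2 nodes edges l := by
    intro l
    obtain ⟨_, hc⟩ := pvCount_fold (((edges.foldl (fun st e =>
      ((pvMergeB (pvSeen (pvSeen st e.1) e.2).1 (pvSeen (pvSeen st e.1) e.2).2.1 e.1 e.2).1,
       (pvMergeB (pvSeen (pvSeen st e.1) e.2).1 (pvSeen (pvSeen st e.1) e.2).2.1 e.1 e.2).2,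
       (pvSeen (pvSeen st e.1) e.2).2.2))
      (PySem.Dict.empty, PySem.Dict.empty, PySem.Dict.empty))).2.2)
      (pvComp nodes edges).items PySem.Dict.empty PySem.Dict.empty l
    rw [hc, hitems, List.countP_map]
    unfold pvCnt2
    rw [PySem.Dict.getD_empty, zero_add]
    norm_cast
    refine List.countP_congr (fun k hk => ?_)
    have hck : (pvComp nodes edges).contains k = true :=
      (PySem.Dict.contains_iff_mem_keys _ k).mpr hk
    rw [Function.comp_apply]
    rw [hcong1 k hck, hcong2 k]
  simp only [List.cons.injEq, and_true]
  constructor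
  · exact congrArg List.sum (List.map_congr_left (fun l _ => by rw [hg1 l]; rfl))
  · exact congrArg List.sum (List.map_congr_left (fun l _ => by rw [hg2 l]; rfl))

theorem pvARef_eq_alt (nodes : List Int) (edges : List (Int × Int))
    (hpre : Pre_solution nodes edges) : pvARef nodes edges = solution_alt nodes edges := by
  rw [pvARef_eval nodes edges hpre, pvAlt_eval nodes edges]

-- ===== VERDICT (by name: the statement is the Claim_ definition above) =====
theorem solution_spec : Claim_equal_solution := by
  intro nodes edges _ hpre
  unfold Spec_solution
  rw [pvA_eq_ARef nodes edges hpre, pvARef_eq_alt nodes edges hpre]
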